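-- pv_equiv track=rewrite | github.com/Anni-065/mkv-manager | core/mkv_cleaner.py | find_best_break_point
-- ===== SOURCE A (Python) =====
-- def find_best_break_point(text, max_length):
--     """
--     Find the best position to break a line, prioritizing natural pauses.
--
--     Args:
--         text: Text to analyze
--         max_length: Maximum allowed length
--
--     Returns:
--         Position to break at, or -1 if no good break point found
--     """
--     if len(text) <= max_length:
--         return -1
--
--     break_chars = [
--         # High priority: sentence endings and major pauses
--         ('.', 2), ('!', 2), ('?', 2), (';', 2),
--         # Medium priority: clause separators
--         (',', 1), (':', 1),
--         # Lower priority: conjunctions and prepositions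
--         (' and ', 1), (' or ', 1), (' but ', 1), (' so ', 1),
--         (' with ', 1), (' for ', 1), (' to ', 1), (' in ', 1),
--         # Lowest priority: any space
--         (' ', 0)
--     ]
--
--     best_position = -1
--     best_priority = -1
--
--     search_text = text[:max_length + 1]
--
--     for char, priority in break_chars:
--         pos = search_text.rfind(char)
--
--         while pos != -1:
--             break_pos = pos + len(char)
--
--             if (break_pos <= max_length and
--                 break_pos > best_position and
--                 break_pos >= 15 and
--                     priority >= best_priority):
--                 best_position = break_pos
--                 best_priority = priority
--
--             pos = search_text.rfind(char, 0, pos)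
--
--     return best_position if best_position > 0 else -1
-- ===== SOURCE B (Python) =====
-- WORDS = ('and', 'or', 'but', 'so', 'with', 'for', 'to', 'in')
--
--
-- def _priority(prefix):
--     """Break priority of a cut right after `prefix`, or -1 if none."""
--     if prefix.endswith(('.', '!', '?', ';')):
--         return 2
--     if prefix.endswith((',', ':')):
--         return 1
--     if prefix.endswith(' '):
--         if any(prefix.endswith(' %s ' % w) for w in WORDS):
--             return 1
--         return 0
--     return -1
--
--
-- def find_best_break_point(text, max_length):
--     """Single left-to-right pass over cut positions, classifying each by the
--     suffix of the text before it; keeps the best (priority, position)."""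
--     if len(text) <= max_length:
--         return -1
--
--     best = -1
--     best_pr = -1
--     for bp in range(15, max_length + 1):
--         pr = _priority(text[:bp])
--         if pr >= 0 and pr >= best_pr:
--             best_pr, best = pr, bp
--     return best
-- ===== Notes on version B (the rewrite author's own statement) =====
-- stated objective: alternative
-- what changed: Replaces A's fifteen per-pattern right-to-left rfind scans (inner while loop per pattern, running best across patterns) by a single left-to-right pass over cut positions 15..max_length that classifies the text prefix before each cut by its suffix (sentence end, clause separator, spaced keyword word list, or space) and keeps the best (priority, position) pair.
-- intended difference: On texts where the spaced keyword ending exactly at max_length+1 also occurs one overlap earlier (e.g. ' to to ' at the cut), no sentence-end break is in range and another priority-1 break survives, A's rfind(char, 0, pos) skips the overlapping occurrence and returns the smaller surviving priority-1 position (15 on the witness), while B returns the skipped keyword break max_length+2-len(kw) (19 on the witness), the intended best break. — e.g. on find_best_break_point("aaaaaaaaaaaaaa, to to ", 21): A returns 15, B returns 19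
import Mathlib
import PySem

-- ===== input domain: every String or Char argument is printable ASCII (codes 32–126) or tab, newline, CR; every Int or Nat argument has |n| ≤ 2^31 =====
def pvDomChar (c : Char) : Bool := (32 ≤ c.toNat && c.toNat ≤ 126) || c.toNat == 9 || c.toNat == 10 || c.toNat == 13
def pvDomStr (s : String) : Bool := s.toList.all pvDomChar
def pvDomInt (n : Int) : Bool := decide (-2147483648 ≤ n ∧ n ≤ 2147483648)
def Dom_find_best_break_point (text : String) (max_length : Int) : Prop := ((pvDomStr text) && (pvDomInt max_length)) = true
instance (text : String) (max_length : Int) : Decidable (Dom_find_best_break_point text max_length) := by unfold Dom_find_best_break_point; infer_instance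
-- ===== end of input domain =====

-- B replaces A's fifteen per-pattern reverse rfind scans by one left-to-right pass over cut
-- positions that classifies the suffix before each cut (an alternative algorithm of similar
-- cost, not claimed faster).

-- ===== PORT A =====
-- A's inner `while pos != -1` loop. The fuel argument only makes the recursion
-- structural (it never runs out: the rfind result strictly decreases below pos);
-- `pos ≤ -1` is Python's `pos != -1` exit (rfind never returns less than -1).
def pvLoopA (search pat : List Char) (priority ml : Int) :
    Nat → Int → Int → Int → Int × Int
  | 0, _, best_position, best_priority => (best_position, best_priority)
  | fuel+1, pos, best_position, best_priority =>
    if pos ≤ -1 then (best_position, best_priority)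
    else
      let break_pos := pos + (pat.length : Int)
      if break_pos ≤ ml ∧ break_pos > best_position ∧ break_pos ≥ 15 ∧ priority ≥ best_priority then
        pvLoopA search pat priority ml fuel
          (PySem.Chars.rfindFrom search pat 0 (some pos)) break_pos priority
      else
        pvLoopA search pat priority ml fuel
          (PySem.Chars.rfindFrom search pat 0 (some pos)) best_position best_priority

-- A's break_chars table (hoisted literal)
def pvBreakChars : List (List Char × Int) :=
  [(['.'], 2), (['!'], 2), (['?'], 2), ([';'], 2),
   ([','], 1), ([':'], 1),
   ([' ','a','n','d',' '], 1), ([' ','o','r',' '], 1), ([' ','b','u','t',' '], 1),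
   ([' ','s','o',' '], 1), ([' ','w','i','t','h',' '], 1), ([' ','f','o','r',' '], 1),
   ([' ','t','o',' '], 1), ([' ','i','n',' '], 1),
   ([' '], 0)]

def find_best_break_point (text : String) (max_length : Int) : Int :=
  let tl := text.toList
  if (tl.length : Int) ≤ max_length then -1
  else
    let break_chars := pvBreakChars
    let search_text := PySem.List.slice tl none (some (max_length + 1))
    let st := break_chars.foldl
      (fun (st : Int × Int) cp =>
        pvLoopA search_text cp.1 cp.2 max_length (search_text.length + 1)
          (PySem.Chars.rfind search_text cp.1) st.1 st.2)
      (-1, -1)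
    if st.1 > 0 then st.1 else -1

-- ===== PORT B =====
-- bare conjunction/preposition words; B tests ' '+w+' ' as a suffix of the prefix before a cut
def pvWords : List (List Char) :=
  [['a','n','d'],['o','r'],['b','u','t'],['s','o'],['w','i','t','h'],['f','o','r'],['t','o'],['i','n']]

-- B's helper `_priority(prefix)`: classify the cut right after `prefix`
def pvPrio (pre : List Char) : Int :=
  if ['.'].isSuffixOf pre || ['!'].isSuffixOf pre || ['?'].isSuffixOf pre || [';'].isSuffixOf pre then 2
  else if [','].isSuffixOf pre || [':'].isSuffixOf pre then 1
  else if [' '].isSuffixOf pre then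
    (if pvWords.any (fun w => (' ' :: w ++ [' ']).isSuffixOf pre) then 1 else 0)
  else -1

def find_best_break_point_alt (text : String) (max_length : Int) : Int :=
  let tl := text.toList
  if (tl.length : Int) ≤ max_length then -1
  else
    ((PySem.List.pyRange 15 (max_length + 1) 1).foldl
      (fun (st : Int × Int) bp =>
        let pr := pvPrio (PySem.List.slice tl none (some bp))
        if pr ≥ 0 ∧ pr ≥ st.1 then (pr, bp) else st)
      (-1, -1)).2

-- ===== PRECONDITION & SPEC =====
-- pvOcc2 t p i: the pattern p occurs in t ending exactly at position i (all uses have |p| ≤ i)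
abbrev pvOcc2 (t p : List Char) (i : Nat) : Prop := p <+: t.drop (i - p.length)

-- When the spaced-keyword entry of A's break table that ends exactly at max_length+1 also
-- occurs one overlap earlier (e.g. " to to " at the cut), A's rfind(char, 0, pos) skips that
-- earlier occurrence, and if no sentence-end break is in range but another priority-1 break
-- is, A returns that smaller priority-1 position while B returns the skipped keyword break
-- max_length+2-len(kw), the intended best break.
def D_find_best_break_point (text : String) (max_length : Int) : Prop :=
  ∃ cp ∈ pvBreakChars, 1 < cp.1.length ∧
    15 ≤ max_length.toNat + 2 - cp.1.length ∧
    pvOcc2 text.toList cp.1 (max_length.toNat + 1) ∧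
    pvOcc2 text.toList cp.1 (max_length.toNat + 2 - cp.1.length) ∧
    (∀ bp ≤ max_length.toNat, 15 ≤ bp → ∀ dp ∈ pvBreakChars, dp.2 = 2 → ¬ pvOcc2 text.toList dp.1 bp) ∧
    (∃ bp ≤ max_length.toNat, 15 ≤ bp ∧ bp ≠ max_length.toNat + 2 - cp.1.length ∧
      ∃ dp ∈ pvBreakChars, dp.2 = 1 ∧ pvOcc2 text.toList dp.1 bp)
instance (text : String) (max_length : Int) : Decidable (D_find_best_break_point text max_length) := by
  unfold D_find_best_break_point; infer_instance

def Spec_find_best_break_point (text : String) (max_length : Int) (out : Int) : Prop :=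
  ¬ D_find_best_break_point text max_length → out = find_best_break_point_alt text max_length
instance (text : String) (max_length : Int) (out : Int) : Decidable (Spec_find_best_break_point text max_length out) := by
  unfold Spec_find_best_break_point; infer_instance

def pvDiffWitness_find_best_break_point : String × Int := ("aaaaaaaaaaaaaa, to to ", 21)
def pvDiffWitnessOut_find_best_break_point : Int × Int := (15, 19)

-- ===== CLAIM (what is proved, stated in full; the proofs are below) =====
def Claim_unchanged_find_best_break_point : Prop := ∀ (text : String) (max_length : Int), Dom_find_best_break_point text max_length → Spec_find_best_break_point text max_length (find_best_break_point text max_length)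
def Claim_changed_find_best_break_point : Prop := Dom_find_best_break_point (pvDiffWitness_find_best_break_point.1) (pvDiffWitness_find_best_break_point.2) ∧ D_find_best_break_point (pvDiffWitness_find_best_break_point.1) (pvDiffWitness_find_best_break_point.2) ∧ find_best_break_point (pvDiffWitness_find_best_break_point.1) (pvDiffWitness_find_best_break_point.2) = pvDiffWitnessOut_find_best_break_point.1 ∧ find_best_break_point_alt (pvDiffWitness_find_best_break_point.1) (pvDiffWitness_find_best_break_point.2) = pvDiffWitnessOut_find_best_break_point.2 ∧ pvDiffWitnessOut_find_best_break_point.1 ≠ pvDiffWitnessOut_find_best_break_point.2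
def Claim_exact_find_best_break_point : Prop := ∀ (text : String) (max_length : Int), Dom_find_best_break_point text max_length → D_find_best_break_point text max_length → find_best_break_point text max_length ≠ find_best_break_point_alt text max_length

-- ===== LEMMAS AND PROOFS =====

-- Bool form of the occurrence test (with the length guard) used by all proofs
def pvOcc (t p : List Char) (i : Nat) : Bool :=
  decide (p.length ≤ i) && p.isPrefixOf (t.drop (i - p.length))

-- ---------- A's rfind chain ----------

lemma pv_rfind_go_spec (t sub : List Char) (k : Nat) :
    (PySem.Chars.rfind.go t sub k = -1 ∧ ∀ j : Nat, j ≤ k → ¬ sub <+: t.drop j) ∨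
    (∃ j : Nat, PySem.Chars.rfind.go t sub k = (j : Int) ∧ j ≤ k ∧ sub <+: t.drop j ∧
      ∀ i : Nat, j < i → i ≤ k → ¬ sub <+: t.drop i) := by
  induction k with
  | zero =>
    rw [PySem.Chars.rfind.go]
    by_cases h : sub.isPrefixOf t
    · right; exact ⟨0, by simp [h], by omega, by simpa [List.isPrefixOf_iff_prefix] using h, by omega⟩
    · left
      refine ⟨by simp [h], ?_⟩
      intro j hj
      interval_cases j
      simpa [List.isPrefixOf_iff_prefix] using h
  | succ k ih =>
    rw [PySem.Chars.rfind.go]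
    by_cases h : sub.isPrefixOf (t.drop (k+1))
    · right
      refine ⟨k+1, by simp [h], le_refl _, by simpa [List.isPrefixOf_iff_prefix] using h, by omega⟩
    · have hnp : ¬ sub <+: t.drop (k+1) := by simpa [List.isPrefixOf_iff_prefix] using h
      simp only [h, if_false]
      rcases ih with ⟨he, hall⟩ | ⟨j, he, hjk, hp, hmax⟩
      · left
        refine ⟨he, ?_⟩
        intro j hj
        rcases Nat.lt_or_ge j (k+1) with h' | h'
        · exact hall j (by omega)
        · have : j = k+1 := by omega
          subst this; exact hnp
      · right
        refine ⟨j, he, by omega, hp, ?_⟩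
        intro i hi hik
        rcases Nat.lt_or_ge i (k+1) with h' | h'
        · exact hmax i hi (by omega)
        · have : i = k+1 := by omega
          subst this; exact hnp

lemma pv_prefix_take_iff (tl sub : List Char) (c j : Nat) (hsub : sub ≠ []) :
    sub <+: (tl.take c).drop j ↔ (sub <+: tl.drop j ∧ j + sub.length ≤ c) := by
  rw [List.drop_take, List.prefix_take_iff]
  constructor
  · rintro ⟨h1, h2⟩
    have hl : 0 < sub.length := List.length_pos_iff.mpr hsub
    exact ⟨h1, by omega⟩
  · rintro ⟨h1, h2⟩
    exact ⟨h1, by omega⟩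

def pvPosSpec (tl pat : List Char) (a : Nat) (pos : Int) : Prop :=
  (pos = -1 ∧ ∀ j : Nat, j + pat.length ≤ a → ¬ pat <+: tl.drop j) ∨
  (∃ j : Nat, pos = (j : Int) ∧ j + pat.length ≤ a ∧ pat <+: tl.drop j ∧
    ∀ j' : Nat, j < j' → j' + pat.length ≤ a → ¬ pat <+: tl.drop j')

lemma pvPosSpec_lt {tl pat : List Char} {a : Nat} {pos : Int} (h : pvPosSpec tl pat a pos)
    (hpat : pat ≠ []) : pos < (a : Int) ∧ -1 ≤ pos := by
  have hl : 0 < pat.length := List.length_pos_iff.mpr hpat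
  rcases h with ⟨he, _⟩ | ⟨j, he, hja, _, _⟩
  · subst he; constructor <;> omega
  · subst he
    constructor
    · exact_mod_cast by omega
    · exact_mod_cast by omega

lemma pv_rfind_posSpec (tl sub : List Char) (m : Nat) (hsub : sub ≠ []) :
    pvPosSpec tl sub (m+1) (PySem.Chars.rfind (tl.take (m+1)) sub) := by
  have hl : 0 < sub.length := List.length_pos_iff.mpr hsub
  show pvPosSpec _ _ _ (PySem.Chars.rfind.go (tl.take (m+1)) sub (tl.take (m+1)).length)
  rcases pv_rfind_go_spec (tl.take (m+1)) sub (tl.take (m+1)).length with ⟨he, hall⟩ | ⟨j, he, hjk, hp, hmax⟩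
  · left
    refine ⟨he, ?_⟩
    intro j hj hpre
    have hj' : sub <+: (tl.take (m+1)).drop j := (pv_prefix_take_iff tl sub (m+1) j hsub).mpr ⟨hpre, hj⟩
    have : j ≤ (tl.take (m+1)).length := by
      have := hj'.length_le
      simp only [List.length_drop] at this
      omega
    exact (hall j this) hj'
  · right
    have hj2 := (pv_prefix_take_iff tl sub (m+1) j hsub).mp hp
    refine ⟨j, he, hj2.2, hj2.1, ?_⟩
    intro j' hjj' hj'a hpre
    have hj' : sub <+: (tl.take (m+1)).drop j' := (pv_prefix_take_iff tl sub (m+1) j' hsub).mpr ⟨hpre, hj'a⟩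
    have : j' ≤ (tl.take (m+1)).length := by
      have := hj'.length_le
      simp only [List.length_drop] at this
      omega
    exact (hmax j' hjj' this) hj'

lemma pv_rfindFrom_eq (tl sub : List Char) (m j : Nat) (hj : j ≤ m+1) :
    PySem.Chars.rfindFrom (tl.take (m+1)) sub 0 (some (j : Int)) =
      (if PySem.Chars.rfind (tl.take (min (tl.take (m+1)).length j)) sub = -1 then -1
       else PySem.Chars.rfind (tl.take (min (tl.take (m+1)).length j)) sub) := by
  simp only [PySem.Chars.rfindFrom]
  simp only [if_neg (show ¬ ((0:Int) < 0) by omega), if_neg (show ¬ ((j:Int) < 0) by omega)]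
  by_cases hc : ((tl.take (m+1)).length : Int) < (j:Int)
  · have hmin : min (tl.take (m+1)).length j = (tl.take (m+1)).length := by omega
    simp only [if_pos hc, hmin]
    rw [if_neg (show ¬ ((tl.take (m+1)).length : Int) < 0 by omega)]
    simp only [List.take_take, List.length_take, zero_add, Int.toNat_natCast, Int.toNat_zero,
      List.drop_zero]
    rw [show min (min (m + 1) tl.length) (m + 1) = min (m+1) tl.length by omega]
  · have hjs : j ≤ (tl.take (m+1)).length := by omega
    have hmin : min (tl.take (m+1)).length j = j := by omega
    simp only [if_neg hc, hmin]
    rw [if_neg (show ¬ ((j:Int)) < 0 by omega)]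
    simp only [List.take_take, zero_add, Int.toNat_natCast, Int.toNat_zero, List.drop_zero]
    rw [Nat.min_eq_left (by omega : j ≤ m+1)]

lemma pv_rfindFrom_posSpec (tl sub : List Char) (m j : Nat) (hsub : sub ≠ [])
    (hj : j + sub.length ≤ m + 1) :
    pvPosSpec tl sub j (PySem.Chars.rfindFrom (tl.take (m+1)) sub 0 (some (j : Int))) := by
  have hl : 0 < sub.length := List.length_pos_iff.mpr hsub
  rw [pv_rfindFrom_eq tl sub m j (by omega)]
  set e' := min (tl.take (m+1)).length j with he'
  have he'j : e' ≤ j := by omega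
  have hcap : ∀ i : Nat, i + sub.length ≤ j → sub <+: tl.drop i → i + sub.length ≤ e' := by
    intro i hij hpre
    have hlen := hpre.length_le
    simp only [List.length_drop] at hlen
    simp only [he', List.length_take]
    omega
  have hiff : ∀ i : Nat, (sub <+: (tl.take e').drop i ↔ (sub <+: tl.drop i ∧ i + sub.length ≤ e')) :=
    fun i => pv_prefix_take_iff tl sub e' i hsub
  show pvPosSpec tl sub j (if PySem.Chars.rfind.go (tl.take e') sub (tl.take e').length = -1 then -1
    else PySem.Chars.rfind.go (tl.take e') sub (tl.take e').length)
  rcases pv_rfind_go_spec (tl.take e') sub (tl.take e').length with ⟨he, hall⟩ | ⟨j0, he, hjk, hp, hmax⟩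
  · rw [he, if_pos rfl]
    left
    refine ⟨rfl, ?_⟩
    intro i hi hpre
    have hie : i + sub.length ≤ e' := hcap i hi hpre
    have h1 : sub <+: (tl.take e').drop i := (hiff i).mpr ⟨hpre, hie⟩
    have h2 : i ≤ (tl.take e').length := by
      have := h1.length_le
      simp only [List.length_drop] at this
      omega
    exact (hall i h2) h1
  · rw [he, if_neg (by omega)]
    right
    have h2 := (hiff j0).mp hp
    refine ⟨j0, rfl, by omega, h2.1, ?_⟩
    intro i hji hi hpre
    have hie : i + sub.length ≤ e' := hcap i hi hpre
    have h1 : sub <+: (tl.take e').drop i := (hiff i).mpr ⟨hpre, hie⟩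
    have h3 : i ≤ (tl.take e').length := by
      have := h1.length_le
      simp only [List.length_drop] at this
      omega
    exact (hmax i hji h3) h1

def pvM (tl pat : List Char) (bp : Nat) : Prop :=
  pat.length ≤ bp ∧ pat <+: tl.drop (bp - pat.length)

def pvQA (tl pat : List Char) (m a : Nat) (b : Int) (bp : Nat) : Prop :=
  pvM tl pat bp ∧ 15 ≤ bp ∧ bp ≤ m ∧ bp ≤ a ∧ b < (bp : Int) ∧
    ¬(bp = m + 2 - pat.length ∧ pvM tl pat (m+1) ∧ m + 1 ≤ a)

lemma pv_overlap (x pat : List Char) (s j : Nat) (h1 : pat <+: x.drop s)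
    (h2 : pat <+: x.drop j) (hlt : s < j) : pat.drop (j - s) <+: pat := by
  have hx : x.drop j = (x.drop s).drop (j - s) := by
    rw [List.drop_drop]; congr 1; omega
  have h3 : pat.drop (j - s) <+: (x.drop s).drop (j - s) := h1.drop (j - s)
  rw [← hx] at h3
  exact List.prefix_of_prefix_length_le h3 h2 (by simp)

lemma pvLoopA_spec (tl pat : List Char) (pri : Int) (m : Nat)
    (hpat : pat ≠ [])
    (hstiff : ∀ d : Nat, d < pat.length → 0 < d → d + 1 < pat.length → ¬ pat.drop d <+: pat) :
    ∀ fuel a : Nat, a ≤ m + 1 → ∀ pos : Int, pvPosSpec tl pat a pos → pos < (fuel : Int) →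
    ∀ b p : Int,
      (pri < p → pvLoopA (tl.take (m+1)) pat pri (m : Int) fuel pos b p = (b, p)) ∧
      ((∀ bp : Nat, ¬ pvQA tl pat m a b bp) →
        pvLoopA (tl.take (m+1)) pat pri (m : Int) fuel pos b p = (b, p)) ∧
      (∀ bp0 : Nat, pri ≥ p → pvQA tl pat m a b bp0 →
        (∀ bp : Nat, pvQA tl pat m a b bp → bp ≤ bp0) →
        pvLoopA (tl.take (m+1)) pat pri (m : Int) fuel pos b p = ((bp0 : Int), pri)) := by
  have hl : 0 < pat.length := List.length_pos_iff.mpr hpat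
  intro fuel
  induction fuel with
  | zero =>
    intro a ha pos hps hlt b p
    have hb := pvPosSpec_lt hps hpat
    have hpos : pos = -1 := by omega
    subst hpos
    have hQempty : ∀ bp : Nat, ¬ pvQA tl pat m a (b := b) bp := by
      rcases hps with ⟨_, hnone⟩ | ⟨j, hj, _⟩
      · intro bp ⟨⟨hlbp, hpre⟩, _, _, hba, _, _⟩
        exact hnone (bp - pat.length) (by omega) hpre
      · exact absurd hj (by omega)
    refine ⟨fun _ => rfl, fun _ => rfl, fun bp0 _ hbp0 _ => absurd hbp0 (hQempty bp0)⟩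
  | succ fuel ih =>
    intro a ha pos hps hlt b p
    rcases hps with ⟨hpos, hnone⟩ | ⟨j, hpos, hja, hpre, hmaxj⟩
    · subst hpos
      have hstep : ∀ b' p' : Int, pvLoopA (tl.take (m+1)) pat pri (m : Int) (fuel+1) (-1) b' p' = (b', p') := by
        intro b' p'
        simp [pvLoopA]
      have hQempty : ∀ bp : Nat, ¬ pvQA tl pat m a (b := b) bp := by
        intro bp ⟨⟨hlbp, hpre⟩, _, _, hba, _, _⟩
        exact hnone (bp - pat.length) (by omega) hpre
      exact ⟨fun _ => hstep b p, fun _ => hstep b p, fun bp0 _ hbp0 _ => absurd hbp0 (hQempty bp0)⟩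
    · subst hpos
      obtain ⟨jl, hjl⟩ : ∃ jl, jl = j + pat.length := ⟨_, rfl⟩
      have hcast : (j : Int) + (pat.length : Int) = (jl : Int) := by omega
      have hstep : ∀ b' p' : Int, pvLoopA (tl.take (m+1)) pat pri (m : Int) (fuel+1) (j : Int) b' p' =
          (if (jl : Int) ≤ (m : Int) ∧ (jl : Int) > b' ∧ (jl : Int) ≥ 15 ∧ pri ≥ p' then
            pvLoopA (tl.take (m+1)) pat pri (m : Int) fuel
              (PySem.Chars.rfindFrom (tl.take (m+1)) pat 0 (some (j : Int))) (jl : Int) pri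
          else
            pvLoopA (tl.take (m+1)) pat pri (m : Int) fuel
              (PySem.Chars.rfindFrom (tl.take (m+1)) pat 0 (some (j : Int))) b' p') := by
        intro b' p'
        rw [pvLoopA]
        rw [if_neg (by omega : ¬ (j : Int) ≤ -1)]
        simp only [hcast]
      have hps' : pvPosSpec tl pat j (PySem.Chars.rfindFrom (tl.take (m+1)) pat 0 (some (j : Int))) :=
        pv_rfindFrom_posSpec tl pat m j hpat (by omega)
      have hlt' : PySem.Chars.rfindFrom (tl.take (m+1)) pat 0 (some (j : Int)) < (fuel : Int) := by
        have := pvPosSpec_lt hps' hpat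
        omega
      have ihj := ih j (by omega) _ hps' hlt'
      have hQmono : ∀ (b'' : Int) (bp : Nat), pvQA tl pat m j b'' bp → pvQA tl pat m a b'' bp := by
        intro b'' bp ⟨hM, h15, hm, hba, hbb, hskip⟩
        refine ⟨hM, h15, hm, by omega, hbb, ?_⟩
        rintro ⟨hbp, hM1, hm1a⟩
        have hj' : m + 1 - pat.length ≤ j := by
          by_contra hcon
          exact hmaxj (m + 1 - pat.length) (by omega) (by omega) hM1.2
        omega
      have htop : ∀ bp : Nat, pvQA tl pat m a b bp → bp ≤ jl := by
        intro bp ⟨⟨hlbp, hpr⟩, h15, hm, hba, hbb, hskip⟩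
        by_contra hcon
        exact hmaxj (bp - pat.length) (by omega) (by omega) hpr
      refine ⟨?_, ?_, ?_⟩
      · intro hlp
        rw [hstep b p, if_neg (by intro hC; omega)]
        exact (ihj b p).1 hlp
      · intro hQe
        have hnC : ¬ ((jl : Int) ≤ (m : Int) ∧ (jl : Int) > b ∧ (jl : Int) ≥ 15 ∧ pri ≥ p) := by
          rintro ⟨h1, h2, h3, h4⟩
          refine hQe jl ⟨⟨by omega, by rw [hjl]; simpa using hpre⟩, by omega, by omega, by omega, by omega, ?_⟩
          rintro ⟨hbp, hM1, hm1a⟩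
          have hj' : m + 1 - pat.length ≤ j := by
            by_contra hcon
            exact hmaxj (m + 1 - pat.length) (by omega) (by omega) hM1.2
          omega
        rw [hstep b p, if_neg hnC]
        exact (ihj b p).2.1 (fun bp hbp => hQe bp (hQmono b bp hbp))
      · intro bp0 hpp hQ0 hmax0
        by_cases hC : ((jl : Int) ≤ (m : Int) ∧ (jl : Int) > b ∧ (jl : Int) ≥ 15 ∧ pri ≥ p)
        · have hjlQ : pvQA tl pat m a b jl := by
            refine ⟨⟨by omega, by rw [hjl]; simpa using hpre⟩, by omega, by omega, by omega, by omega, ?_⟩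
            rintro ⟨hbp, hM1, hm1a⟩
            have hj' : m + 1 - pat.length ≤ j := by
              by_contra hcon
              exact hmaxj (m + 1 - pat.length) (by omega) (by omega) hM1.2
            omega
          have hbp0 : bp0 = jl := le_antisymm (htop bp0 hQ0) (hmax0 jl hjlQ)
          rw [hstep b p, if_pos hC]
          have := (ihj (jl : Int) pri).2.1 (fun bp hbp => by
            have h1 : bp ≤ j := hbp.2.2.2.1
            have h2 : (jl : Int) < (bp : Int) := hbp.2.2.2.2.1
            omega)
          rw [this, hbp0]
        · rw [hstep b p, if_neg hC]
          have h15bp0 : 15 ≤ bp0 := hQ0.2.1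
          have hbbp0 : b < (bp0 : Int) := hQ0.2.2.2.2.1
          have hbp0jl : bp0 ≤ jl := htop bp0 hQ0
          by_cases hm1 : jl ≤ m
          · exfalso
            apply hC
            refine ⟨by omega, by omega, by omega, hpp⟩
          · have hjlm : jl = m + 1 := by omega
            have hbp0j : bp0 ≤ j := by
              by_contra hcon
              have hbp0lt : bp0 < jl := by
                have hQm : bp0 ≤ m := hQ0.2.2.1
                omega
              have hlb0 : pat.length ≤ bp0 := hQ0.1.1
              have hs0 : bp0 - pat.length < j := by omega
              have hd : pat.drop (j - (bp0 - pat.length)) <+: pat :=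
                pv_overlap tl pat (bp0 - pat.length) j hQ0.1.2 hpre hs0
              set d := j - (bp0 - pat.length) with hdd
              have hd1 : d < pat.length := by omega
              have hd2 : 0 < d := by omega
              rcases Nat.lt_or_ge (d+1) pat.length with hlt2 | hge2
              · exact hstiff d hd1 hd2 hlt2 hd
              · have hbp0v : bp0 = m + 2 - pat.length := by omega
                exact hQ0.2.2.2.2.2 ⟨hbp0v, ⟨by omega, by
                  have : m + 1 - pat.length = j := by omega
                  rw [this]; exact hpre⟩, by omega⟩
            have hQ0j : pvQA tl pat m j b bp0 := by
              refine ⟨hQ0.1, hQ0.2.1, hQ0.2.2.1, hbp0j, hQ0.2.2.2.2.1, ?_⟩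
              rintro ⟨_, _, hm1j⟩
              omega
            exact (ihj b p).2.2 bp0 hpp hQ0j (fun bp hbp => hmax0 bp (hQmono b bp hbp))

lemma pv_exists_greatest (P : Nat → Prop) (m : Nat) (h : ∃ bp, P bp) (hb : ∀ bp, P bp → bp ≤ m) :
    ∃ w, P w ∧ ∀ bp, P bp → bp ≤ w := by
  classical
  obtain ⟨n, hn⟩ := h
  refine ⟨Nat.findGreatest P m, Nat.findGreatest_spec (hb n hn) hn, ?_⟩
  intro bp hbp
  exact Nat.le_findGreatest (hb bp hbp) hbp

-- ---------- the fold over A's pattern list ----------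

def pvFoldA (tl : List Char) (m : Nat) (G : List (List Char × Int)) (s : Int × Int) : Int × Int :=
  G.foldl
    (fun (st : Int × Int) cp =>
      pvLoopA (tl.take (m+1)) cp.1 cp.2 (m : Int) ((tl.take (m+1)).length + 1)
        (PySem.Chars.rfind (tl.take (m+1)) cp.1) st.1 st.2) s

def pvQG (tl : List Char) (m : Nat) (G : List (List Char × Int)) (b : Int) (bp : Nat) : Prop :=
  ∃ cp ∈ G, pvQA tl cp.1 m (m+1) b bp

def pvGood (cp : List Char × Int) : Prop :=
  cp.1 ≠ [] ∧ ∀ d : Nat, d < cp.1.length → 0 < d → d + 1 < cp.1.length → ¬ cp.1.drop d <+: cp.1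

lemma pvStep_spec (tl : List Char) (m : Nat) (hmn : m < tl.length) (cp : List Char × Int)
    (hcp : pvGood cp) (b p : Int) :
    (cp.2 < p → pvLoopA (tl.take (m+1)) cp.1 cp.2 (m : Int) ((tl.take (m+1)).length + 1)
        (PySem.Chars.rfind (tl.take (m+1)) cp.1) b p = (b, p)) ∧
    ((∀ bp : Nat, ¬ pvQA tl cp.1 m (m+1) b bp) →
      pvLoopA (tl.take (m+1)) cp.1 cp.2 (m : Int) ((tl.take (m+1)).length + 1)
        (PySem.Chars.rfind (tl.take (m+1)) cp.1) b p = (b, p)) ∧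
    (∀ bp0 : Nat, cp.2 ≥ p → pvQA tl cp.1 m (m+1) b bp0 →
      (∀ bp : Nat, pvQA tl cp.1 m (m+1) b bp → bp ≤ bp0) →
      pvLoopA (tl.take (m+1)) cp.1 cp.2 (m : Int) ((tl.take (m+1)).length + 1)
        (PySem.Chars.rfind (tl.take (m+1)) cp.1) b p = ((bp0 : Int), cp.2)) := by
  have hps := pv_rfind_posSpec tl cp.1 m hcp.1
  have hlen : (tl.take (m+1)).length = m + 1 := by
    simp [List.length_take]; omega
  have hlt : PySem.Chars.rfind (tl.take (m+1)) cp.1 < (((tl.take (m+1)).length + 1 : Nat) : Int) := by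
    have := pvPosSpec_lt hps hcp.1
    omega
  exact pvLoopA_spec tl cp.1 cp.2 m hcp.1 hcp.2 ((tl.take (m+1)).length + 1) (m+1) le_rfl _ hps hlt b p

lemma pvFoldA_skip (tl : List Char) (m : Nat) (hmn : m < tl.length)
    (G : List (List Char × Int)) (hG : ∀ cp ∈ G, pvGood cp) (b p : Int)
    (hlow : ∀ cp ∈ G, cp.2 < p) :
    pvFoldA tl m G (b, p) = (b, p) := by
  induction G with
  | nil => rfl
  | cons cp G ih =>
    have h1 := (pvStep_spec tl m hmn cp (hG cp (by simp)) b p).1 (hlow cp (by simp))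
    show pvFoldA tl m G (pvLoopA (tl.take (m+1)) cp.1 cp.2 (m : Int) ((tl.take (m+1)).length + 1)
        (PySem.Chars.rfind (tl.take (m+1)) cp.1) b p) = _
    rw [h1]
    exact ih (fun c hc => hG c (by simp [hc])) (fun c hc => hlow c (by simp [hc]))

lemma pvFoldA_empty (tl : List Char) (m : Nat) (hmn : m < tl.length)
    (G : List (List Char × Int)) (hG : ∀ cp ∈ G, pvGood cp) (b p : Int)
    (hemp : ∀ bp : Nat, ¬ pvQG tl m G b bp) :
    pvFoldA tl m G (b, p) = (b, p) := by
  induction G with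
  | nil => rfl
  | cons cp G ih =>
    have h1 := (pvStep_spec tl m hmn cp (hG cp (by simp)) b p).2.1
      (fun bp hbp => hemp bp ⟨cp, by simp, hbp⟩)
    show pvFoldA tl m G (pvLoopA (tl.take (m+1)) cp.1 cp.2 (m : Int) ((tl.take (m+1)).length + 1)
        (PySem.Chars.rfind (tl.take (m+1)) cp.1) b p) = _
    rw [h1]
    exact ih (fun c hc => hG c (by simp [hc])) (fun bp hbp => hemp bp (by
      obtain ⟨c, hc, hq⟩ := hbp
      exact ⟨c, by simp [hc], hq⟩))

lemma pvFoldA_max (tl : List Char) (m : Nat) (hmn : m < tl.length)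
    (G : List (List Char × Int)) (hG : ∀ cp ∈ G, pvGood cp) (q : Int)
    (hq : ∀ cp ∈ G, cp.2 = q) :
    ∀ b p : Int, q ≥ p → ∀ w : Nat, pvQG tl m G b w → (∀ bp : Nat, pvQG tl m G b bp → bp ≤ w) →
    pvFoldA tl m G (b, p) = ((w : Int), q) := by
  induction G with
  | nil =>
    intro b p _ w hw _
    obtain ⟨c, hc, _⟩ := hw
    exact absurd hc (by simp)
  | cons cp G ih =>
    intro b p hqp w hw hmax
    have hgood := hG cp (by simp)
    have hq1 : cp.2 = q := hq cp (by simp)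
    by_cases hcp : ∃ bp : Nat, pvQA tl cp.1 m (m+1) b bp
    · obtain ⟨w1, hw1, hmax1⟩ := pv_exists_greatest _ m hcp (fun bp hbp => hbp.2.2.1)
      have h1 := (pvStep_spec tl m hmn cp hgood b p).2.2 w1 (by omega) hw1 hmax1
      show pvFoldA tl m G (pvLoopA (tl.take (m+1)) cp.1 cp.2 (m : Int) ((tl.take (m+1)).length + 1)
          (PySem.Chars.rfind (tl.take (m+1)) cp.1) b p) = _
      rw [h1, hq1]
      have hbw1 : b < (w1 : Int) := hw1.2.2.2.2.1
      by_cases hG' : ∃ bp : Nat, pvQG tl m G (w1 : Int) bp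
      · obtain ⟨bpx, hbpx⟩ := hG'
        have hww1 : w1 < w := by
          obtain ⟨c, hc, hqx⟩ := hbpx
          have h2 : pvQG tl m (cp :: G) b bpx := ⟨c, by simp [hc], by
            exact ⟨hqx.1, hqx.2.1, hqx.2.2.1, hqx.2.2.2.1, by
              have := hqx.2.2.2.2.1
              omega, hqx.2.2.2.2.2⟩⟩
          have h3 : w1 < bpx := by exact_mod_cast hqx.2.2.2.2.1
          have h4 : bpx ≤ w := hmax bpx h2
          omega
        have hwG' : pvQG tl m G (w1 : Int) w := by
          obtain ⟨c, hc, hqx⟩ := hw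
          rcases List.mem_cons.mp hc with hceq | hcG
          · subst hceq
            exact absurd (hmax1 w hqx) (by omega)
          · exact ⟨c, hcG, ⟨hqx.1, hqx.2.1, hqx.2.2.1, hqx.2.2.2.1, by
              exact_mod_cast hww1, hqx.2.2.2.2.2⟩⟩
        refine ih (fun c hc => hG c (by simp [hc])) (fun c hc => hq c (by simp [hc]))
          (w1 : Int) q (le_refl q) w hwG' ?_
        intro bp hbp
        obtain ⟨c, hc, hqx⟩ := hbp
        refine hmax bp ⟨c, by simp [hc], ⟨hqx.1, hqx.2.1, hqx.2.2.1, hqx.2.2.2.1, by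
          have := hqx.2.2.2.2.1
          omega, hqx.2.2.2.2.2⟩⟩
      · have hww1 : w = w1 := by
          have h4 : w1 ≤ w := hmax w1 ⟨cp, by simp, hw1⟩
          rcases Nat.lt_or_ge w1 w with hlt2 | hge2
          · exfalso
            obtain ⟨c, hc, hqx⟩ := hw
            rcases List.mem_cons.mp hc with hceq | hcG
            · subst hceq
              exact absurd (hmax1 w hqx) (by omega)
            · exact hG' ⟨w, ⟨c, hcG, ⟨hqx.1, hqx.2.1, hqx.2.2.1, hqx.2.2.2.1, by
                exact_mod_cast hlt2, hqx.2.2.2.2.2⟩⟩⟩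
          · omega
        rw [hww1]
        exact pvFoldA_empty tl m hmn G (fun c hc => hG c (by simp [hc])) (w1 : Int) q
          (fun bp hbp => hG' ⟨bp, hbp⟩)
    · have h1 := (pvStep_spec tl m hmn cp hgood b p).2.1 (fun bp hbp => hcp ⟨bp, hbp⟩)
      show pvFoldA tl m G (pvLoopA (tl.take (m+1)) cp.1 cp.2 (m : Int) ((tl.take (m+1)).length + 1)
          (PySem.Chars.rfind (tl.take (m+1)) cp.1) b p) = _
      rw [h1]
      have hwG : pvQG tl m G b w := by
        obtain ⟨c, hc, hqx⟩ := hw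
        rcases List.mem_cons.mp hc with hceq | hcG
        · subst hceq
          exact absurd ⟨w, hqx⟩ hcp
        · exact ⟨c, hcG, hqx⟩
      refine ih (fun c hc => hG c (by simp [hc])) (fun c hc => hq c (by simp [hc])) b p hqp w hwG ?_
      intro bp hbp
      obtain ⟨c, hc, hqx⟩ := hbp
      exact hmax bp ⟨c, by simp [hc], hqx⟩

lemma pvOcc_iff (tl pat : List Char) (bp : Nat) : pvOcc tl pat bp = true ↔ pvM tl pat bp := by
  simp [pvOcc, pvM, List.isPrefixOf_iff_prefix]

def pvKw : List (List Char) :=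
  [[' ','a','n','d',' '], [' ','o','r',' '], [' ','b','u','t',' '],
   [' ','s','o',' '], [' ','w','i','t','h',' '], [' ','f','o','r',' '],
   [' ','t','o',' '], [' ','i','n',' ']]

def pvInRangeb (m bp : Nat) : Bool := decide (15 ≤ bp) && decide (bp ≤ m)
-- a keyword match ending at bp that A's rfind skips: it overlaps a match of the
-- same keyword ending exactly at m+1
def pvSkipb (tl : List Char) (m : Nat) (pat : List Char) (bp : Nat) : Bool :=
  decide (bp = m + 2 - pat.length) && pvOcc tl pat (m + 1)
def pvC2b (tl : List Char) (m bp : Nat) : Bool :=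
  pvInRangeb m bp && [['.'],['!'],['?'],[';']].any (fun pat => pvOcc tl pat bp)
def pvC1Ab (tl : List Char) (m bp : Nat) : Bool :=
  pvInRangeb m bp &&
    ([[','],[':']] ++ pvKw).any (fun pat => pvOcc tl pat bp && !pvSkipb tl m pat bp)
def pvC1b (tl : List Char) (m bp : Nat) : Bool :=
  pvInRangeb m bp && ([[','],[':']] ++ pvKw).any (fun pat => pvOcc tl pat bp)
def pvC0b (tl : List Char) (m bp : Nat) : Bool :=
  pvInRangeb m bp && pvOcc tl [' '] bp
def pvEb (tl : List Char) (m bp : Nat) : Bool :=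
  pvInRangeb m bp && pvKw.any (fun pat => pvOcc tl pat bp && pvSkipb tl m pat bp)

def pvG2 : List (List Char × Int) := [(['.'],2),(['!'],2),(['?'],2),([';'],2)]
def pvG1 : List (List Char × Int) :=
  [([','],1),([':'],1),([' ','a','n','d',' '],1),([' ','o','r',' '],1),([' ','b','u','t',' '],1),
   ([' ','s','o',' '],1),([' ','w','i','t','h',' '],1),([' ','f','o','r',' '],1),
   ([' ','t','o',' '],1),([' ','i','n',' '],1)]
def pvG0 : List (List Char × Int) := [([' '],0)]

lemma pv_patfacts : ∀ cp ∈ pvG2 ++ pvG1 ++ pvG0, pvGood cp := by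
  intro cp hcp
  fin_cases hcp <;> exact ⟨by decide, by decide⟩

lemma pvQG2_iff (tl : List Char) (m : Nat) (b : Int) (bp : Nat) :
    pvQG tl m pvG2 b bp ↔ (pvC2b tl m bp = true ∧ b < (bp:Int)) := by
  constructor
  · rintro ⟨cp, hcp, hq⟩
    refine ⟨?_, hq.2.2.2.2.1⟩
    simp only [pvC2b, pvInRangeb, Bool.and_eq_true, decide_eq_true_eq, List.any_eq_true]
    refine ⟨⟨hq.2.1, hq.2.2.1⟩, ⟨cp.1, ?_, (pvOcc_iff _ _ _).mpr hq.1⟩⟩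
    fin_cases hcp <;> simp
  · rintro ⟨hb, hlt⟩
    simp only [pvC2b, pvInRangeb, Bool.and_eq_true, decide_eq_true_eq, List.any_eq_true] at hb
    obtain ⟨⟨h15, hm⟩, pat, hpat, hMb⟩ := hb
    have hM := (pvOcc_iff _ _ _).mp hMb
    have hlen : pat.length = 1 := by fin_cases hpat <;> rfl
    refine ⟨(pat, 2), ?_, ⟨hM, h15, hm, by omega, hlt, ?_⟩⟩
    · fin_cases hpat <;> simp [pvG2]
    · rintro ⟨h1, _, _⟩
      have h1' : bp = m + 2 - pat.length := h1
      omega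

lemma pvQG0_iff (tl : List Char) (m : Nat) (b : Int) (bp : Nat) :
    pvQG tl m pvG0 b bp ↔ (pvC0b tl m bp = true ∧ b < (bp:Int)) := by
  constructor
  · rintro ⟨cp, hcp, hq⟩
    refine ⟨?_, hq.2.2.2.2.1⟩
    simp only [pvC0b, pvInRangeb, Bool.and_eq_true, decide_eq_true_eq]
    have hcp1 : cp.1 = [' '] := by fin_cases hcp <;> rfl
    rw [hcp1] at hq
    exact ⟨⟨hq.2.1, hq.2.2.1⟩, (pvOcc_iff _ _ _).mpr hq.1⟩
  · rintro ⟨hb, hlt⟩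
    simp only [pvC0b, pvInRangeb, Bool.and_eq_true, decide_eq_true_eq] at hb
    obtain ⟨⟨h15, hm⟩, hMb⟩ := hb
    refine ⟨([' '], 0), by simp [pvG0], ⟨(pvOcc_iff _ _ _).mp hMb, h15, hm, by omega, hlt, ?_⟩⟩
    rintro ⟨h1, _, _⟩
    simp at h1
    omega

lemma pvQG1_iff (tl : List Char) (m : Nat) (b : Int) (bp : Nat) :
    pvQG tl m pvG1 b bp ↔ (pvC1Ab tl m bp = true ∧ b < (bp:Int)) := by
  constructor
  · rintro ⟨cp, hcp, hq⟩
    refine ⟨?_, hq.2.2.2.2.1⟩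
    simp only [pvC1Ab, pvInRangeb, Bool.and_eq_true, decide_eq_true_eq, List.any_eq_true]
    refine ⟨⟨hq.2.1, hq.2.2.1⟩, ⟨cp.1, ?_, ?_⟩⟩
    · exact (show ∀ c ∈ pvG1, c.1 ∈ [[','],[':']] ++ pvKw from by decide) cp hcp
    · refine ⟨(pvOcc_iff _ _ _).mpr hq.1, ?_⟩
      rw [Bool.not_eq_eq_eq_not, Bool.not_true, pvSkipb]
      rw [Bool.and_eq_false_iff]
      by_cases he : bp = m + 2 - cp.1.length
      · right
        rw [← Bool.not_eq_true, pvOcc_iff]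
        intro hM1
        exact hq.2.2.2.2.2 ⟨he, hM1, le_refl _⟩
      · left
        simpa using he
  · rintro ⟨hb, hlt⟩
    simp only [pvC1Ab, pvInRangeb, Bool.and_eq_true, decide_eq_true_eq, List.any_eq_true] at hb
    obtain ⟨⟨h15, hm⟩, pat, hpat, hMb⟩ := hb
    have hM := (pvOcc_iff _ _ _).mp hMb.1
    refine ⟨(pat, 1), ?_, ⟨hM, h15, hm, by omega, hlt, ?_⟩⟩
    · exact (show ∀ p ∈ [[','],[':']] ++ pvKw, (p, (1:Int)) ∈ pvG1 from by decide) pat hpat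
    · rintro ⟨h1, hM1, _⟩
      have := hMb.2
      rw [Bool.not_eq_eq_eq_not, Bool.not_true, pvSkipb, Bool.and_eq_false_iff] at this
      rcases this with h | h
      · simp only [decide_eq_false_iff_not] at h
        exact h h1
      · exact absurd ((pvOcc_iff _ _ _).mpr hM1) (by simp [h])

-- A's fold over the whole pattern list, by cases on which class is nonempty
lemma pvA_char2 (tl : List Char) (m : Nat) (hmn : m < tl.length) (w : Nat)
    (hw : pvC2b tl m w = true) (hmax : ∀ bp, pvC2b tl m bp = true → bp ≤ w) :
    pvFoldA tl m (pvG2 ++ pvG1 ++ pvG0) (-1,-1) = ((w:Int), 2) := by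
  have hG := pv_patfacts
  have hsplit : pvFoldA tl m (pvG2 ++ pvG1 ++ pvG0) (-1,-1)
      = pvFoldA tl m pvG0 (pvFoldA tl m pvG1 (pvFoldA tl m pvG2 (-1,-1))) := by
    simp [pvFoldA, List.foldl_append]
  rw [hsplit]
  have h15w : 15 ≤ w := by
    simp only [pvC2b, pvInRangeb, Bool.and_eq_true, decide_eq_true_eq] at hw
    exact hw.1.1
  have h2 : pvFoldA tl m pvG2 (-1,-1) = ((w:Int), 2) := by
    refine pvFoldA_max tl m hmn pvG2 (fun c hc => hG c (by simp [hc])) 2 (by decide) (-1) (-1)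
      (by omega) w ((pvQG2_iff tl m (-1) w).mpr ⟨hw, by omega⟩) ?_
    intro bp hbp
    exact hmax bp ((pvQG2_iff tl m (-1) bp).mp hbp).1
  rw [h2]
  rw [pvFoldA_skip tl m hmn pvG1 (fun c hc => hG c (by simp [pvG1] at hc ⊢; tauto)) _ _
    (by intro c hc; fin_cases hc <;> norm_num)]
  rw [pvFoldA_skip tl m hmn pvG0 (fun c hc => hG c (by simp [pvG0] at hc ⊢; tauto)) _ _
    (by intro c hc; fin_cases hc <;> norm_num)]

lemma pvA_char1 (tl : List Char) (m : Nat) (hmn : m < tl.length)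
    (hnc2 : ∀ bp, ¬ pvC2b tl m bp = true) (w : Nat)
    (hw : pvC1Ab tl m w = true) (hmax : ∀ bp, pvC1Ab tl m bp = true → bp ≤ w) :
    pvFoldA tl m (pvG2 ++ pvG1 ++ pvG0) (-1,-1) = ((w:Int), 1) := by
  have hG := pv_patfacts
  have hsplit : pvFoldA tl m (pvG2 ++ pvG1 ++ pvG0) (-1,-1)
      = pvFoldA tl m pvG0 (pvFoldA tl m pvG1 (pvFoldA tl m pvG2 (-1,-1))) := by
    simp [pvFoldA, List.foldl_append]
  rw [hsplit]
  rw [pvFoldA_empty tl m hmn pvG2 (fun c hc => hG c (by simp [pvG2] at hc ⊢; tauto)) (-1) (-1)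
    (fun bp hbp => hnc2 bp ((pvQG2_iff tl m (-1) bp).mp hbp).1)]
  have h1 : pvFoldA tl m pvG1 (-1,-1) = ((w:Int), 1) := by
    refine pvFoldA_max tl m hmn pvG1 (fun c hc => hG c (by simp [pvG1] at hc ⊢; tauto)) 1
      (by decide) (-1) (-1) (by omega) w ((pvQG1_iff tl m (-1) w).mpr ⟨hw, by omega⟩) ?_
    intro bp hbp
    exact hmax bp ((pvQG1_iff tl m (-1) bp).mp hbp).1
  rw [h1]
  rw [pvFoldA_skip tl m hmn pvG0 (fun c hc => hG c (by simp [pvG0] at hc ⊢; tauto)) _ _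
    (by intro c hc; fin_cases hc <;> norm_num)]

lemma pvA_char0 (tl : List Char) (m : Nat) (hmn : m < tl.length)
    (hnc2 : ∀ bp, ¬ pvC2b tl m bp = true) (hnc1 : ∀ bp, ¬ pvC1Ab tl m bp = true) (w : Nat)
    (hw : pvC0b tl m w = true) (hmax : ∀ bp, pvC0b tl m bp = true → bp ≤ w) :
    pvFoldA tl m (pvG2 ++ pvG1 ++ pvG0) (-1,-1) = ((w:Int), 0) := by
  have hG := pv_patfacts
  have hsplit : pvFoldA tl m (pvG2 ++ pvG1 ++ pvG0) (-1,-1)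
      = pvFoldA tl m pvG0 (pvFoldA tl m pvG1 (pvFoldA tl m pvG2 (-1,-1))) := by
    simp [pvFoldA, List.foldl_append]
  rw [hsplit]
  rw [pvFoldA_empty tl m hmn pvG2 (fun c hc => hG c (by simp [pvG2] at hc ⊢; tauto)) (-1) (-1)
    (fun bp hbp => hnc2 bp ((pvQG2_iff tl m (-1) bp).mp hbp).1)]
  rw [pvFoldA_empty tl m hmn pvG1 (fun c hc => hG c (by simp [pvG1] at hc ⊢; tauto)) (-1) (-1)
    (fun bp hbp => hnc1 bp ((pvQG1_iff tl m (-1) bp).mp hbp).1)]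
  refine pvFoldA_max tl m hmn pvG0 (fun c hc => hG c (by simp [pvG0] at hc ⊢; tauto)) 0
    (by decide) (-1) (-1) (by omega) w ((pvQG0_iff tl m (-1) w).mpr ⟨hw, by omega⟩) ?_
  intro bp hbp
  exact hmax bp ((pvQG0_iff tl m (-1) bp).mp hbp).1

lemma pvA_charNone (tl : List Char) (m : Nat) (hmn : m < tl.length)
    (hnc2 : ∀ bp, ¬ pvC2b tl m bp = true) (hnc1 : ∀ bp, ¬ pvC1Ab tl m bp = true)
    (hnc0 : ∀ bp, ¬ pvC0b tl m bp = true) :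
    pvFoldA tl m (pvG2 ++ pvG1 ++ pvG0) (-1,-1) = (-1, -1) := by
  have hG := pv_patfacts
  have hsplit : pvFoldA tl m (pvG2 ++ pvG1 ++ pvG0) (-1,-1)
      = pvFoldA tl m pvG0 (pvFoldA tl m pvG1 (pvFoldA tl m pvG2 (-1,-1))) := by
    simp [pvFoldA, List.foldl_append]
  rw [hsplit]
  rw [pvFoldA_empty tl m hmn pvG2 (fun c hc => hG c (by simp [pvG2] at hc ⊢; tauto)) (-1) (-1)
    (fun bp hbp => hnc2 bp ((pvQG2_iff tl m (-1) bp).mp hbp).1)]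
  rw [pvFoldA_empty tl m hmn pvG1 (fun c hc => hG c (by simp [pvG1] at hc ⊢; tauto)) (-1) (-1)
    (fun bp hbp => hnc1 bp ((pvQG1_iff tl m (-1) bp).mp hbp).1)]
  rw [pvFoldA_empty tl m hmn pvG0 (fun c hc => hG c (by simp [pvG0] at hc ⊢; tauto)) (-1) (-1)
    (fun bp hbp => hnc0 bp ((pvQG0_iff tl m (-1) bp).mp hbp).1)]

-- ---------- string bridges between A's match relation and B's suffix tests ----------

lemma pv_suffix_iff (tl pat : List Char) (bp : Nat) (h : bp ≤ tl.length) :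
    pat.isSuffixOf (tl.take bp) = pvOcc tl pat bp := by
  rw [Bool.eq_iff_iff, List.isSuffixOf_iff_suffix, pvOcc_iff]
  constructor
  · intro hs
    have hlen : pat.length ≤ bp := by
      have := hs.length_le; simp [List.length_take] at this; omega
    refine ⟨hlen, ?_⟩
    obtain ⟨s, hsapp⟩ := hs
    have hslen : s.length = bp - pat.length := by
      have := congrArg List.length hsapp; simp [List.length_take] at this; omega
    have hdrop : tl.drop (bp - pat.length) = pat ++ tl.drop bp := by
      conv_lhs => rw [← List.take_append_drop bp tl]
      rw [List.drop_append_of_le_length (by simp [List.length_take]; omega),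
        ← hsapp, ← hslen, List.drop_left]
    rw [hdrop]; exact List.prefix_append pat _
  · rintro ⟨hlen, hp⟩
    have ht : tl.take bp = tl.take (bp - pat.length) ++ pat := by
      rw [show bp = (bp - pat.length) + pat.length by omega, List.take_add]
      rw [show bp - pat.length + pat.length - pat.length = bp - pat.length from by omega,
        ← List.prefix_iff_eq_take.mp hp]
    rw [ht]; exact ⟨_, rfl⟩

lemma pv_suffix_of_le (tl p q : List Char) (bp : Nat) (hbp : bp ≤ tl.length)
    (hp : pvOcc tl p bp = true) (hq : pvOcc tl q bp = true) (hle : p.length ≤ q.length) :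
    p <:+ q := by
  rw [← pv_suffix_iff tl p bp hbp] at hp
  rw [← pv_suffix_iff tl q bp hbp] at hq
  rw [List.isSuffixOf_iff_suffix] at hp hq
  rw [← List.reverse_prefix] at hp hq ⊢
  exact List.prefix_of_prefix_length_le hp hq (by simpa using hle)

lemma pvKw_unique (tl : List Char) (bp : Nat) (hbp : bp ≤ tl.length)
    {p q : List Char} (hpk : p ∈ pvKw) (hqk : q ∈ pvKw)
    (hp : pvOcc tl p bp = true) (hq : pvOcc tl q bp = true) : p = q := by
  rcases le_total p.length q.length with h | h
  · exact (show ∀ a ∈ pvKw, ∀ b ∈ pvKw, a <:+ b → a = b by decide) p hpk q hqk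
      (pv_suffix_of_le tl p q bp hbp hp hq h)
  · exact ((show ∀ a ∈ pvKw, ∀ b ∈ pvKw, a <:+ b → a = b by decide) q hqk p hpk
      (pv_suffix_of_le tl q p bp hbp hq hp h)).symm

lemma pv_words_eq : pvWords.map (fun w => ' ' :: w ++ [' ']) = pvKw := by decide

lemma pvKw_space (tl pat : List Char) (bp : Nat) (hpat : pat ∈ pvKw)
    (h : pvOcc tl pat bp = true) : pvOcc tl [' '] bp = true := by
  rw [pvOcc_iff] at h ⊢
  obtain ⟨hlb, hpre⟩ := h
  have hdrop : pat.drop (pat.length - 1) = [' '] :=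
    (show ∀ p ∈ pvKw, p.drop (p.length - 1) = [' '] from by decide) pat hpat
  have hlp : 0 < pat.length :=
    (show ∀ p ∈ pvKw, 0 < p.length from by decide) pat hpat
  refine ⟨by simp only [List.length_singleton]; omega, ?_⟩
  have h2 : pat.drop (pat.length - 1) <+: (tl.drop (bp - pat.length)).drop (pat.length - 1) :=
    hpre.drop (pat.length - 1)
  rw [hdrop, List.drop_drop] at h2
  have hix : bp - pat.length + (pat.length - 1) = bp - 1 := by omega
  rw [hix] at h2
  simpa using h2

lemma pvPrio_eq (tl : List Char) (m bp : Nat) (h15 : 15 ≤ bp) (hbm : bp ≤ m)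
    (hmn : m < tl.length) :
    pvPrio (tl.take bp) =
      (if pvC2b tl m bp then 2 else if pvC1b tl m bp then 1
       else if pvC0b tl m bp then 0 else -1) := by
  have hb : bp ≤ tl.length := by omega
  have hkw : (pvWords.any fun w => (' ' :: w ++ [' ']).isSuffixOf (tl.take bp))
      = pvKw.any (fun p => pvOcc tl p bp) := by
    have h1 := List.any_map (l := pvWords) (p := fun p => p.isSuffixOf (tl.take bp))
      (f := fun w => ' ' :: w ++ [' '])
    rw [pv_words_eq] at h1
    rw [show ((fun p => p.isSuffixOf (tl.take bp)) ∘ (fun w => ' ' :: w ++ [' ']))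
        = fun w => (' ' :: w ++ [' ']).isSuffixOf (tl.take bp) from rfl] at h1
    rw [← h1]
    have h2 : ∀ (L : List (List Char)),
        L.any (fun p => p.isSuffixOf (tl.take bp)) = L.any (fun p => pvOcc tl p bp) := by
      intro L
      induction L with
      | nil => rfl
      | cons a L ih => simp only [List.any_cons, ih, pv_suffix_iff tl a bp hb]
    exact h2 pvKw
  have hC2 : pvC2b tl m bp
      = (pvOcc tl ['.'] bp || pvOcc tl ['!'] bp || pvOcc tl ['?'] bp || pvOcc tl [';'] bp) := by
    simp [pvC2b, pvInRangeb, h15, hbm, Bool.or_assoc]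
  have hC1 : pvC1b tl m bp
      = (pvOcc tl [','] bp || pvOcc tl [':'] bp || pvKw.any (fun p => pvOcc tl p bp)) := by
    simp [pvC1b, pvInRangeb, h15, hbm, Bool.or_assoc]
  have hC0 : pvC0b tl m bp = pvOcc tl [' '] bp := by
    simp [pvC0b, pvInRangeb, h15, hbm]
  unfold pvPrio
  rw [pv_suffix_iff tl ['.'] bp hb, pv_suffix_iff tl ['!'] bp hb, pv_suffix_iff tl ['?'] bp hb,
    pv_suffix_iff tl [';'] bp hb, pv_suffix_iff tl [','] bp hb, pv_suffix_iff tl [':'] bp hb,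
    pv_suffix_iff tl [' '] bp hb, hkw, hC2, hC1, hC0]
  by_cases h2 : (pvOcc tl ['.'] bp || pvOcc tl ['!'] bp || pvOcc tl ['?'] bp || pvOcc tl [';'] bp) = true
  · rw [if_pos h2, if_pos h2]
  · rw [Bool.not_eq_true] at h2
    simp only [h2, Bool.false_eq_true, if_false]
    by_cases h1 : (pvOcc tl [','] bp || pvOcc tl [':'] bp) = true
    · rw [if_pos h1, if_pos (by simp [h1])]
    · rw [Bool.not_eq_true] at h1
      simp only [h1, Bool.false_or, Bool.false_eq_true, if_false]
      by_cases hg : pvKw.any (fun p => pvOcc tl p bp) = true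
      · obtain ⟨p, hpk, hpo⟩ := List.any_eq_true.mp hg
        rw [if_pos (pvKw_space tl p bp hpk hpo), if_pos hg, if_pos hg]
      · rw [Bool.not_eq_true] at hg
        simp only [hg, Bool.false_eq_true, if_false]

lemma pvKw_len : ∀ p ∈ pvKw, 2 ≤ p.length ∧ p.length ≤ 6 := by decide

lemma pvOcc2_iff (t p : List Char) (i : Nat) (h : p.length ≤ i) :
    pvOcc2 t p i ↔ pvOcc t p i = true := by
  simp [pvOcc2, pvOcc, h, List.isPrefixOf_iff_prefix]

-- facts linking A's break table to the proof-side pattern classes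
lemma pvBC_kw : ∀ cp ∈ pvBreakChars, 1 < cp.1.length → cp.1 ∈ pvKw := by decide
lemma pvKw_BC : ∀ p ∈ pvKw, (p, (1:Int)) ∈ pvBreakChars ∧ 1 < p.length := by decide
lemma pvBC_p2 : ∀ dp ∈ pvBreakChars, dp.2 = 2 → dp.1 ∈ [['.'],['!'],['?'],[';']] := by decide
lemma pvP2_BC : ∀ p ∈ [['.'],['!'],['?'],[';']], (p, (2:Int)) ∈ pvBreakChars := by decide
lemma pvBC_p1 : ∀ dp ∈ pvBreakChars, dp.2 = 1 → dp.1 ∈ [[','],[':']] ++ pvKw := by decide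
lemma pvP1_BC : ∀ p ∈ [[','],[':']] ++ pvKw, (p, (1:Int)) ∈ pvBreakChars := by decide
lemma pvBC_len : ∀ dp ∈ pvBreakChars, dp.1.length ≤ 6 := by decide
lemma pvKw_interior : ∀ p ∈ pvKw, ∀ j < p.length, 1 ≤ j → j + 2 ≤ p.length →
    ¬ [' '] <+: p.drop j ∧ ¬ [','] <+: p.drop j ∧ ¬ [':'] <+: p.drop j := by decide

lemma pvKw_not_punct : ∀ p ∈ pvKw, ¬ [','] <:+ p ∧ ¬ [':'] <:+ p := by decide

lemma pvC1_iff (tl : List Char) (m bp : Nat) :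
    pvC1b tl m bp = true ↔ (pvC1Ab tl m bp = true ∨ pvEb tl m bp = true) := by
  simp only [pvC1b, pvC1Ab, pvEb, pvInRangeb, Bool.and_eq_true, decide_eq_true_eq,
    List.any_eq_true]
  constructor
  · rintro ⟨hr, pat, hpat, hMb⟩
    by_cases hsk : pvSkipb tl m pat bp = true
    · right
      refine ⟨hr, pat, ?_, by simp [hMb, hsk]⟩
      simp only [List.mem_append] at hpat
      rcases hpat with h | h
      · exfalso
        have hsk' := hsk
        simp only [pvSkipb, Bool.and_eq_true, decide_eq_true_eq] at hsk'
        have hlen : pat.length = 1 := by fin_cases h <;> rfl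
        omega
      · exact h
    · left
      exact ⟨hr, pat, hpat, by simp [hMb, hsk]⟩
  · rintro (⟨hr, pat, hpat, hMb⟩ | ⟨hr, pat, hpat, hMb⟩)
    · exact ⟨hr, pat, hpat, hMb.1⟩
    · exact ⟨hr, pat, by simp [hpat], hMb.1⟩

lemma pvE_C0 (tl : List Char) (m bp : Nat) (h : pvEb tl m bp = true) :
    pvC0b tl m bp = true := by
  simp only [pvEb, pvC0b, Bool.and_eq_true, List.any_eq_true] at h ⊢
  obtain ⟨hr, pat, hpat, hMb⟩ := h
  exact ⟨hr, pvKw_space tl pat bp hpat (by simp_all)⟩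

lemma pvE_imp (tl : List Char) (m bp : Nat) (h : pvEb tl m bp = true) :
    ∃ k ∈ pvKw, pvOcc tl k (m+1) = true ∧ pvOcc tl k bp = true ∧
      bp = m + 2 - k.length ∧ 15 ≤ bp ∧ bp ≤ m := by
  simp only [pvEb, pvInRangeb, pvSkipb, Bool.and_eq_true, decide_eq_true_eq,
    List.any_eq_true] at h
  obtain ⟨⟨h15, hbm⟩, pat, hpat, ho, he, h1⟩ := h
  exact ⟨pat, hpat, h1, ho, he, h15, hbm⟩

lemma pvE_intro (tl : List Char) (m : Nat) (k : List Char) (hk : k ∈ pvKw)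
    (hk1 : pvOcc tl k (m+1) = true) (hkq : pvOcc tl k (m+2-k.length) = true)
    (h15 : 15 ≤ m + 2 - k.length) : pvEb tl m (m+2-k.length) = true := by
  have hl := pvKw_len k hk
  simp only [pvEb, pvInRangeb, pvSkipb, Bool.and_eq_true, decide_eq_true_eq,
    List.any_eq_true]
  exact ⟨⟨h15, by omega⟩, k, hk, hkq, rfl, hk1⟩

lemma pvE_unique (tl : List Char) (m : Nat) (hlen : m + 1 ≤ tl.length)
    (k : List Char) (hk : k ∈ pvKw) (hk1 : pvOcc tl k (m+1) = true)
    (bp : Nat) (h : pvEb tl m bp = true) : bp = m + 2 - k.length := by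
  obtain ⟨p, hp, hp1, _, hbp, _, _⟩ := pvE_imp tl m bp h
  rw [show p = k from (pvKw_unique tl (m+1) hlen hk hp hk1 hp1).symm] at hbp
  exact hbp

-- priority-1 break pattern (comma, colon or spaced keyword) ending at bp, no range check
def pvP1b (tl : List Char) (bp : Nat) : Bool :=
  ([[','],[':']] ++ pvKw).any (fun p => pvOcc tl p bp)

lemma pvP1b_of_C1A (tl : List Char) (m bp : Nat) (h : pvC1Ab tl m bp = true) :
    pvP1b tl bp = true := by
  simp only [pvC1Ab, pvP1b, Bool.and_eq_true, List.any_eq_true] at h ⊢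
  obtain ⟨_, pat, hpat, hMb⟩ := h
  exact ⟨pat, hpat, hMb.1⟩

lemma pvC1A_of_P1b (tl : List Char) (m bp : Nat) (hlen : m + 1 ≤ tl.length)
    (k : List Char) (hk : k ∈ pvKw) (hk1 : pvOcc tl k (m+1) = true)
    (h15 : 15 ≤ bp) (hbm : bp ≤ m) (hne : bp ≠ m + 2 - k.length)
    (h : pvP1b tl bp = true) : pvC1Ab tl m bp = true := by
  simp only [pvP1b, List.any_eq_true] at h
  simp only [pvC1Ab, pvInRangeb, Bool.and_eq_true, decide_eq_true_eq, List.any_eq_true]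
  refine ⟨⟨h15, hbm⟩, ?_⟩
  obtain ⟨pat, hpat, ho⟩ := h
  refine ⟨pat, hpat, ?_⟩
  simp only [ho, Bool.true_and, Bool.not_eq_eq_eq_not, Bool.not_true, pvSkipb]
  rw [Bool.and_eq_false_iff]
  simp only [List.mem_append] at hpat
  rcases hpat with hc | hkw
  · refine ⟨trivial, Or.inl ?_⟩
    have hl1 : pat.length = 1 := by fin_cases hc <;> rfl
    simp only [decide_eq_false_iff_not]
    omega
  · refine ⟨trivial, ?_⟩
    by_cases h1 : pvOcc tl pat (m+1) = true
    · refine Or.inl ?_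
      have heq : pat = k := pvKw_unique tl (m+1) hlen hkw hk h1 hk1
      simp only [decide_eq_false_iff_not, heq]
      exact hne
    · exact Or.inr (by simpa using h1)

-- inside a keyword occurrence ending at max_length+1 there is no space, comma or colon
lemma pv_interior (tl k : List Char) (m bp : Nat) (hk : k ∈ pvKw)
    (hk1 : pvOcc tl k (m+1) = true) (hq : m + 2 - k.length < bp) (hbm : bp ≤ m)
    (c : Char) (hc : c = ' ' ∨ c = ',' ∨ c = ':') (ho : pvOcc tl [c] bp = true) : False := by
  have hkl := pvKw_len k hk
  obtain ⟨hklm, hpre⟩ := (pvOcc_iff tl k (m+1)).mp hk1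
  obtain ⟨hb1, hoc⟩ := (pvOcc_iff tl [c] bp).mp ho
  simp only [List.length_singleton] at hb1
  obtain ⟨j, hj⟩ : ∃ j, j = bp - 1 - (m + 1 - k.length) := ⟨_, rfl⟩
  have hj1 : 1 ≤ j := by omega
  have hj2 : j + 2 ≤ k.length := by omega
  have h1 : k.drop j <+: tl.drop (bp - 1) := by
    have := hpre.drop j
    rw [List.drop_drop] at this
    rw [show m + 1 - k.length + j = bp - 1 from by omega] at this
    exact this
  have hcp : [c] <+: k.drop j := by
    refine List.prefix_of_prefix_length_le ?_ h1 ?_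
    · simpa using hoc
    · simp only [List.length_singleton, List.length_drop]
      omega
  have hfacts := pvKw_interior k hk j (by omega) hj1 hj2
  rcases hc with h | h | h <;> rw [h] at hcp
  · exact hfacts.1 hcp
  · exact hfacts.2.1 hcp
  · exact hfacts.2.2 hcp

-- hence every priority-1 break other than the skipped one lies strictly before it …
lemma pv_p1_lt_q (tl k : List Char) (m bp : Nat) (hk : k ∈ pvKw)
    (hk1 : pvOcc tl k (m+1) = true) (hbm : bp ≤ m) (hne : bp ≠ m + 2 - k.length)
    (hp : pvP1b tl bp = true) : bp < m + 2 - k.length := by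
  by_contra hge
  have hq : m + 2 - k.length < bp := by omega
  simp only [pvP1b, List.any_eq_true] at hp
  obtain ⟨pat, hpat, ho⟩ := hp
  simp only [List.mem_append] at hpat
  rcases hpat with hc | hkw
  · have : pat = [','] ∨ pat = [':'] := by fin_cases hc <;> simp
    rcases this with h | h <;> rw [h] at ho
    · exact pv_interior tl k m bp hk hk1 hq hbm ',' (by simp) ho
    · exact pv_interior tl k m bp hk hk1 hq hbm ':' (by simp) ho
  · exact pv_interior tl k m bp hk hk1 hq hbm ' ' (by simp)
      (pvKw_space tl pat bp hkw ho)

-- … and every space break lies at or before it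
lemma pv_space_le_q (tl k : List Char) (m bp : Nat) (hk : k ∈ pvKw)
    (hk1 : pvOcc tl k (m+1) = true) (hbm : bp ≤ m)
    (hsp : pvOcc tl [' '] bp = true) : bp ≤ m + 2 - k.length := by
  by_contra hgt
  exact pv_interior tl k m bp hk hk1 (by omega) hbm ' ' (by simp) hsp

lemma pvC1A_q_false (tl : List Char) (m : Nat) (hlen : m + 1 ≤ tl.length)
    (k : List Char) (hk : k ∈ pvKw) (hk1 : pvOcc tl k (m+1) = true)
    (hkq : pvOcc tl k (m+2-k.length) = true) :
    pvC1Ab tl m (m+2-k.length) = false := by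
  have hkl := pvKw_len k hk
  have hq : m + 2 - k.length ≤ tl.length := by omega
  rw [Bool.eq_false_iff]
  intro hC
  simp only [pvC1Ab, pvInRangeb, Bool.and_eq_true, decide_eq_true_eq, List.any_eq_true] at hC
  obtain ⟨_, pat, hpat, ho, hns⟩ := hC
  simp only [List.mem_append] at hpat
  rcases hpat with h | h
  · have h1 : pat.length ≤ k.length := by fin_cases h <;> simp <;> omega
    have hsfx := pv_suffix_of_le tl pat k (m+2-k.length) hq ho hkq h1
    have := pvKw_not_punct k hk
    fin_cases h
    · exact this.1 hsfx
    · exact this.2 hsfx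
  · have heq : pat = k := pvKw_unique tl (m+2-k.length) hq h hk ho hkq
    rw [heq] at hns
    simp [pvSkipb, hk1] at hns

lemma pvC2b_range (tl : List Char) (m bp : Nat) (h : pvC2b tl m bp = true) : 15 ≤ bp ∧ bp ≤ m := by
  simp only [pvC2b, pvInRangeb, Bool.and_eq_true, decide_eq_true_eq] at h
  exact h.1

lemma pvC1Ab_range (tl : List Char) (m bp : Nat) (h : pvC1Ab tl m bp = true) : 15 ≤ bp ∧ bp ≤ m := by
  simp only [pvC1Ab, pvInRangeb, Bool.and_eq_true, decide_eq_true_eq] at h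
  exact h.1

lemma pvC1b_range (tl : List Char) (m bp : Nat) (h : pvC1b tl m bp = true) : 15 ≤ bp ∧ bp ≤ m := by
  simp only [pvC1b, pvInRangeb, Bool.and_eq_true, decide_eq_true_eq] at h
  exact h.1

lemma pvC0b_range (tl : List Char) (m bp : Nat) (h : pvC0b tl m bp = true) : 15 ≤ bp ∧ bp ≤ m := by
  simp only [pvC0b, pvInRangeb, Bool.and_eq_true, decide_eq_true_eq] at h
  exact h.1

-- ---------- the B side ----------

def pvFoldB (tl : List Char) (uI : Int) : Int × Int :=
  (PySem.List.pyRange 15 uI 1).foldl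
    (fun (st : Int × Int) bp =>
      if pvPrio (PySem.List.slice tl none (some bp)) ≥ 0 ∧
          pvPrio (PySem.List.slice tl none (some bp)) ≥ st.1
      then (pvPrio (PySem.List.slice tl none (some bp)), bp) else st)
    (-1, -1)

def pvBInv (tl : List Char) (m u : Nat) (st : Int × Int) : Prop :=
  (st = (-1,-1) ∧ ∀ bp, bp < u → ¬ pvC2b tl m bp = true ∧ ¬ pvC1b tl m bp = true ∧ ¬ pvC0b tl m bp = true) ∨
  (∃ w, w < u ∧ st = (2, (w:Int)) ∧ pvC2b tl m w = true ∧ ∀ bp, bp < u → pvC2b tl m bp = true → bp ≤ w) ∨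
  (∃ w, w < u ∧ st = (1, (w:Int)) ∧ pvC1b tl m w = true ∧ (∀ bp, bp < u → ¬ pvC2b tl m bp = true) ∧ ∀ bp, bp < u → pvC1b tl m bp = true → bp ≤ w) ∨
  (∃ w, w < u ∧ st = (0, (w:Int)) ∧ pvC0b tl m w = true ∧ (∀ bp, bp < u → ¬ pvC2b tl m bp = true ∧ ¬ pvC1b tl m bp = true) ∧ ∀ bp, bp < u → pvC0b tl m bp = true → bp ≤ w)

lemma pvC_lt15 (tl : List Char) (m bp : Nat) (h : bp < 15) :
    ¬ pvC2b tl m bp = true ∧ ¬ pvC1b tl m bp = true ∧ ¬ pvC0b tl m bp = true := by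
  refine ⟨?_, ?_, ?_⟩ <;>
    simp [pvC2b, pvC1b, pvC0b, pvInRangeb, show ¬ (15 ≤ bp) from by omega]

lemma pvFoldB_inv (tl : List Char) (m : Nat) (hmn : m < tl.length) :
    ∀ u : Nat, 15 ≤ u → u ≤ m+1 → pvBInv tl m u (pvFoldB tl (u:Int)) := by
  intro u hu
  induction u, hu using Nat.le_induction with
  | base =>
    intro _
    left
    constructor
    · unfold pvFoldB
      rw [PySem.List.pyRange_one_eq_nil (by omega)]
      rfl
    · intro bp hbp
      exact pvC_lt15 tl m bp hbp
  | succ u hu ih =>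
    intro hum
    have hinv := ih (by omega)
    have hsnoc : PySem.List.pyRange 15 ((u+1 : Nat) : Int) 1
        = PySem.List.pyRange 15 ((u:Nat) : Int) 1 ++ [((u:Nat) : Int)] := by
      push_cast
      exact PySem.List.pyRange_one_succ_right (by exact_mod_cast hu)
    have hstep : pvFoldB tl ((u+1 : Nat) : Int) =
        (if (if pvC2b tl m u then 2 else if pvC1b tl m u then 1 else if pvC0b tl m u then (0:Int) else -1) ≥ 0 ∧
            (if pvC2b tl m u then 2 else if pvC1b tl m u then 1 else if pvC0b tl m u then (0:Int) else -1) ≥ (pvFoldB tl ((u:Nat) : Int)).1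
          then ((if pvC2b tl m u then 2 else if pvC1b tl m u then 1 else if pvC0b tl m u then (0:Int) else -1), ((u:Nat) : Int))
          else pvFoldB tl ((u:Nat) : Int)) := by
      unfold pvFoldB
      rw [hsnoc, List.foldl_append]
      simp only [List.foldl_cons, List.foldl_nil]
      rw [PySem.List.slice_to_natCast, pvPrio_eq tl m u hu (by omega) hmn]
    rw [hstep]
    set st := pvFoldB tl ((u:Nat) : Int) with hst
    clear_value st
    by_cases hc2 : pvC2b tl m u = true
    · rw [if_pos hc2]
      rcases hinv with ⟨hste, hnone⟩ | ⟨w, hwu, hste, hcw, hmax⟩ | ⟨w, hwu, hste, hcw, hno2, hmax⟩ | ⟨w, hwu, hste, hcw, hno21, hmax⟩ <;>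
        rw [hste] <;>
        rw [if_pos (by constructor <;> norm_num)] <;>
        refine Or.inr (Or.inl ⟨u, by omega, rfl, hc2, fun bp hbp hcbp => by omega⟩)
    · rw [if_neg hc2]
      by_cases hc1 : pvC1b tl m u = true
      · rw [if_pos hc1]
        rcases hinv with ⟨hste, hnone⟩ | ⟨w, hwu, hste, hcw, hmax⟩ | ⟨w, hwu, hste, hcw, hno2, hmax⟩ | ⟨w, hwu, hste, hcw, hno21, hmax⟩
        · rw [hste, if_pos (by constructor <;> norm_num)]
          refine Or.inr (Or.inr (Or.inl ⟨u, by omega, rfl, hc1, ?_, fun bp hbp hcbp => by omega⟩))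
          intro bp hbp
          rcases Nat.lt_or_ge bp u with h | h
          · exact (hnone bp h).1
          · have : bp = u := by omega
            rw [this]; exact hc2
        · rw [hste, if_neg (by rintro ⟨_, hge⟩; omega)]
          exact Or.inr (Or.inl ⟨w, by omega, rfl, hcw, fun bp hbp hcbp => by
            rcases Nat.lt_or_ge bp u with h | h
            · exact hmax bp h hcbp
            · have : bp = u := by omega
              rw [this] at hcbp; exact absurd hcbp hc2⟩)
        · rw [hste, if_pos (by constructor <;> norm_num)]
          refine Or.inr (Or.inr (Or.inl ⟨u, by omega, rfl, hc1, ?_, fun bp hbp hcbp => by omega⟩))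
          intro bp hbp
          rcases Nat.lt_or_ge bp u with h | h
          · exact hno2 bp h
          · have : bp = u := by omega
            rw [this]; exact hc2
        · rw [hste, if_pos (by constructor <;> norm_num)]
          refine Or.inr (Or.inr (Or.inl ⟨u, by omega, rfl, hc1, ?_, fun bp hbp hcbp => by omega⟩))
          intro bp hbp
          rcases Nat.lt_or_ge bp u with h | h
          · exact (hno21 bp h).1
          · have : bp = u := by omega
            rw [this]; exact hc2
      · rw [if_neg hc1]
        by_cases hc0 : pvC0b tl m u = true
        · rw [if_pos hc0]
          rcases hinv with ⟨hste, hnone⟩ | ⟨w, hwu, hste, hcw, hmax⟩ | ⟨w, hwu, hste, hcw, hno2, hmax⟩ | ⟨w, hwu, hste, hcw, hno21, hmax⟩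
          · rw [hste, if_pos (by constructor <;> norm_num)]
            refine Or.inr (Or.inr (Or.inr ⟨u, by omega, rfl, hc0, ?_, fun bp hbp hcbp => by omega⟩))
            intro bp hbp
            rcases Nat.lt_or_ge bp u with h | h
            · exact ⟨(hnone bp h).1, (hnone bp h).2.1⟩
            · have : bp = u := by omega
              rw [this]; exact ⟨hc2, hc1⟩
          · rw [hste, if_neg (by rintro ⟨_, hge⟩; omega)]
            exact Or.inr (Or.inl ⟨w, by omega, rfl, hcw, fun bp hbp hcbp => by
              rcases Nat.lt_or_ge bp u with h | h
              · exact hmax bp h hcbp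
              · have : bp = u := by omega
                rw [this] at hcbp; exact absurd hcbp hc2⟩)
          · rw [hste, if_neg (by rintro ⟨_, hge⟩; omega)]
            refine Or.inr (Or.inr (Or.inl ⟨w, by omega, rfl, hcw, ?_, ?_⟩))
            · intro bp hbp
              rcases Nat.lt_or_ge bp u with h | h
              · exact hno2 bp h
              · have : bp = u := by omega
                rw [this]; exact hc2
            · intro bp hbp hcbp
              rcases Nat.lt_or_ge bp u with h | h
              · exact hmax bp h hcbp
              · have : bp = u := by omega
                rw [this] at hcbp; exact absurd hcbp hc1
          · rw [hste, if_pos (by constructor <;> norm_num)]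
            refine Or.inr (Or.inr (Or.inr ⟨u, by omega, rfl, hc0, ?_, fun bp hbp hcbp => by omega⟩))
            intro bp hbp
            rcases Nat.lt_or_ge bp u with h | h
            · exact hno21 bp h
            · have : bp = u := by omega
              rw [this]; exact ⟨hc2, hc1⟩
        · rw [if_neg hc0]
          rcases hinv with ⟨hste, hnone⟩ | ⟨w, hwu, hste, hcw, hmax⟩ | ⟨w, hwu, hste, hcw, hno2, hmax⟩ | ⟨w, hwu, hste, hcw, hno21, hmax⟩
          · rw [hste, if_neg (by rintro ⟨hge, _⟩; omega)]
            refine Or.inl ⟨rfl, ?_⟩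
            intro bp hbp
            rcases Nat.lt_or_ge bp u with h | h
            · exact hnone bp h
            · have : bp = u := by omega
              rw [this]; exact ⟨hc2, hc1, hc0⟩
          · rw [hste, if_neg (by rintro ⟨_, hge⟩; omega)]
            exact Or.inr (Or.inl ⟨w, by omega, rfl, hcw, fun bp hbp hcbp => by
              rcases Nat.lt_or_ge bp u with h | h
              · exact hmax bp h hcbp
              · have : bp = u := by omega
                rw [this] at hcbp; exact absurd hcbp hc2⟩)
          · rw [hste, if_neg (by rintro ⟨_, hge⟩; omega)]
            refine Or.inr (Or.inr (Or.inl ⟨w, by omega, rfl, hcw, ?_, ?_⟩))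
            · intro bp hbp
              rcases Nat.lt_or_ge bp u with h | h
              · exact hno2 bp h
              · have : bp = u := by omega
                rw [this]; exact hc2
            · intro bp hbp hcbp
              rcases Nat.lt_or_ge bp u with h | h
              · exact hmax bp h hcbp
              · have : bp = u := by omega
                rw [this] at hcbp; exact absurd hcbp hc1
          · rw [hste, if_neg (by rintro ⟨_, hge⟩; omega)]
            refine Or.inr (Or.inr (Or.inr ⟨w, by omega, rfl, hcw, ?_, ?_⟩))
            · intro bp hbp
              rcases Nat.lt_or_ge bp u with h | h
              · exact hno21 bp h
              · have : bp = u := by omega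
                rw [this]; exact ⟨hc2, hc1⟩
            · intro bp hbp hcbp
              rcases Nat.lt_or_ge bp u with h | h
              · exact hmax bp h hcbp
              · have : bp = u := by omega
                rw [this] at hcbp; exact absurd hcbp hc0

lemma pvB_val1 (tl : List Char) (m : Nat) (hm15 : 15 ≤ m) (hmn : m < tl.length)
    (hno2 : ∀ bp, ¬ pvC2b tl m bp = true) (w : Nat) (hw : pvC1b tl m w = true)
    (hmax : ∀ bp, pvC1b tl m bp = true → bp ≤ w) :
    pvFoldB tl ((m+1 : Nat) : Int) = (1, (w : Int)) := by
  have hinv := pvFoldB_inv tl m hmn (m+1) (by omega) le_rfl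
  rcases hinv with ⟨hste, hnone⟩ | ⟨v, hvu, hste, hcv, _⟩ | ⟨v, hvu, hste, hcv, _, hvmax⟩ |
    ⟨v, hvu, hste, hcv, hno21, hvmax⟩
  · exact absurd hw (hnone w (by have := (pvC1b_range tl m w hw).2; omega)).2.1
  · exact absurd hcv (hno2 v)
  · rw [hste]
    have : v = w := le_antisymm (hmax v hcv)
      (hvmax w (by have := (pvC1b_range tl m w hw).2; omega) hw)
    rw [this]
  · exact absurd hw (hno21 w (by have := (pvC1b_range tl m w hw).2; omega)).2

lemma pvB_val0 (tl : List Char) (m : Nat) (hm15 : 15 ≤ m) (hmn : m < tl.length)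
    (hno2 : ∀ bp, ¬ pvC2b tl m bp = true) (hno1 : ∀ bp, ¬ pvC1b tl m bp = true)
    (w : Nat) (hw : pvC0b tl m w = true) (hmax : ∀ bp, pvC0b tl m bp = true → bp ≤ w) :
    pvFoldB tl ((m+1 : Nat) : Int) = (0, (w : Int)) := by
  have hinv := pvFoldB_inv tl m hmn (m+1) (by omega) le_rfl
  rcases hinv with ⟨hste, hnone⟩ | ⟨v, hvu, hste, hcv, _⟩ | ⟨v, hvu, hste, hcv, _, _⟩ |
    ⟨v, hvu, hste, hcv, hno21, hvmax⟩
  · exact absurd hw (hnone w (by have := (pvC0b_range tl m w hw).2; omega)).2.2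
  · exact absurd hcv (hno2 v)
  · exact absurd hcv (hno1 v)
  · rw [hste]
    have : v = w := le_antisymm (hmax v hcv)
      (hvmax w (by have := (pvC0b_range tl m w hw).2; omega) hw)
    rw [this]

lemma pvB_val2 (tl : List Char) (m : Nat) (hm15 : 15 ≤ m) (hmn : m < tl.length)
    (w : Nat) (hw : pvC2b tl m w = true) (hmax : ∀ bp, pvC2b tl m bp = true → bp ≤ w) :
    pvFoldB tl ((m+1 : Nat) : Int) = (2, (w : Int)) := by
  have hinv := pvFoldB_inv tl m hmn (m+1) (by omega) le_rfl
  rcases hinv with ⟨hste, hnone⟩ | ⟨v, hvu, hste, hcv, hvmax⟩ | ⟨v, hvu, hste, hcv, hno2, _⟩ |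
    ⟨v, hvu, hste, hcv, hno21, _⟩
  · exact absurd hw (hnone w (by have := (pvC2b_range tl m w hw).2; omega)).1
  · rw [hste]
    have : v = w := le_antisymm (hmax v hcv)
      (hvmax w (by have := (pvC2b_range tl m w hw).2; omega) hw)
    rw [this]
  · exact absurd hw (hno2 w (by have := (pvC2b_range tl m w hw).2; omega))
  · exact absurd hw (hno21 w (by have := (pvC2b_range tl m w hw).2; omega)).1

lemma pvB_valNone (tl : List Char) (m : Nat) (hm15 : 15 ≤ m) (hmn : m < tl.length)
    (hno2 : ∀ bp, ¬ pvC2b tl m bp = true) (hno1 : ∀ bp, ¬ pvC1b tl m bp = true)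
    (hno0 : ∀ bp, ¬ pvC0b tl m bp = true) :
    pvFoldB tl ((m+1 : Nat) : Int) = (-1, -1) := by
  have hinv := pvFoldB_inv tl m hmn (m+1) (by omega) le_rfl
  rcases hinv with ⟨hste, hnone⟩ | ⟨v, hvu, hste, hcv, _⟩ | ⟨v, hvu, hste, hcv, _, _⟩ |
    ⟨v, hvu, hste, hcv, _, _⟩
  · exact hste
  · exact absurd hcv (hno2 v)
  · exact absurd hcv (hno1 v)
  · exact absurd hcv (hno0 v)

-- ---------- glue: the ports equal the proof-side folds ----------

lemma pvA_main (text : String) (ml : Int) (m : Nat) (hml : ml = (m:Int))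
    (hmn : m < text.toList.length) :
    find_best_break_point text ml =
      (if (pvFoldA text.toList m (pvG2 ++ pvG1 ++ pvG0) (-1,-1)).1 > 0
       then (pvFoldA text.toList m (pvG2 ++ pvG1 ++ pvG0) (-1,-1)).1 else -1) := by
  unfold find_best_break_point
  rw [hml]
  rw [if_neg (by exact_mod_cast (by omega : ¬ ((text.toList.length : Int) ≤ (m:Int))))]
  have hslice : PySem.List.slice text.toList none (some ((m:Int) + 1)) = text.toList.take (m+1) := by
    rw [PySem.List.slice_to (xs := text.toList) (b := (m:Int)+1) (by omega)]
    congr 1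
  rw [hslice]
  rfl

lemma pvB_main (text : String) (ml : Int) (hle : ¬ ((text.toList.length : Int) ≤ ml)) :
    find_best_break_point_alt text ml = (pvFoldB text.toList (ml + 1)).2 := by
  unfold find_best_break_point_alt
  rw [if_neg hle]
  rfl

lemma pvLoopA_lt15 (search pat : List Char) (pri ml : Int) (hml : ml < 15) :
    ∀ fuel : Nat, ∀ pos b p : Int, pvLoopA search pat pri ml fuel pos b p = (b, p) := by
  intro fuel
  induction fuel with
  | zero => intro pos b p; rfl
  | succ fuel ih =>
    intro pos b p
    rw [pvLoopA]
    by_cases h1 : pos ≤ -1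
    · rw [if_pos h1]
    · rw [if_neg h1]
      simp only []
      rw [if_neg (by rintro ⟨hc1, _, hc3, _⟩; omega)]
      exact ih _ b p

lemma pvA_lt15 (text : String) (ml : Int) (hle : ¬ ((text.toList.length : Int) ≤ ml))
    (h15 : ml < 15) :
    find_best_break_point text ml = -1 := by
  unfold find_best_break_point
  rw [if_neg hle]
  have hfold : ∀ (G : List (List Char × Int)) (st : Int × Int),
      G.foldl (fun (st : Int × Int) cp =>
        pvLoopA (PySem.List.slice text.toList none (some (ml + 1))) cp.1 cp.2 ml
          ((PySem.List.slice text.toList none (some (ml + 1))).length + 1)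
          (PySem.Chars.rfind (PySem.List.slice text.toList none (some (ml + 1))) cp.1) st.1 st.2) st = st := by
    intro G
    induction G with
    | nil => intro st; rfl
    | cons cp G ih =>
      intro st
      rw [List.foldl_cons, pvLoopA_lt15 _ _ _ _ h15]
      exact ih st
  show (if (List.foldl _ (-1,-1) _).1 > 0 then _ else _) = _
  rw [hfold _ ((-1 : Int), (-1 : Int))]
  norm_num

lemma pvB_lt15 (text : String) (ml : Int) (hle : ¬ ((text.toList.length : Int) ≤ ml))
    (h15 : ml < 15) :
    find_best_break_point_alt text ml = -1 := by
  rw [pvB_main text ml hle]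
  unfold pvFoldB
  rw [PySem.List.pyRange_one_eq_nil (by omega)]
  rfl

lemma pvA_trivial (text : String) (ml : Int) (hle : (text.toList.length : Int) ≤ ml) :
    find_best_break_point text ml = -1 := by
  unfold find_best_break_point
  rw [if_pos hle]

lemma pvB_trivial (text : String) (ml : Int) (hle : (text.toList.length : Int) ≤ ml) :
    find_best_break_point_alt text ml = -1 := by
  unfold find_best_break_point_alt
  rw [if_pos hle]

-- ---------- the combined main-case equality ----------

lemma pv_main_eq (text : String) (ml : Int) (m : Nat) (hml : ml = (m : Int)) (hm15 : 15 ≤ m)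
    (hmn : m < text.toList.length) (hnD : ¬ D_find_best_break_point text ml) :
    find_best_break_point text ml = find_best_break_point_alt text ml := by
  have hle : ¬ ((text.toList.length : Int) ≤ ml) := by omega
  rw [pvA_main text ml m hml hmn, pvB_main text ml hle]
  have hml1 : ml + 1 = ((m+1 : Nat) : Int) := by omega
  rw [hml1]
  set tl := text.toList with htl
  have hmt : ml.toNat = m := by omega
  have hlen1 : m + 1 ≤ tl.length := by omega
  by_cases hex2 : ∃ bp, pvC2b tl m bp = true
  · obtain ⟨w2, hw2, hmax2⟩ := pv_exists_greatest _ m hex2 (fun bp h => (pvC2b_range tl m bp h).2)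
    rw [pvA_char2 tl m hmn w2 hw2 hmax2, pvB_val2 tl m hm15 hmn w2 hw2 hmax2]
    have h15w : 15 ≤ w2 := (pvC2b_range tl m w2 hw2).1
    show (if (w2 : Int) > 0 then (w2 : Int) else -1) = (w2 : Int)
    rw [if_pos (by omega)]
  · have hno2 : ∀ bp, ¬ pvC2b tl m bp = true := not_exists.mp hex2
    by_cases hexE : ∃ bp, pvEb tl m bp = true
    · obtain ⟨bpE, hbpE⟩ := hexE
      obtain ⟨k, hk, hk1, hkbp, hbpq, h15E, hbmE⟩ := pvE_imp tl m bpE hbpE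
      have hkl := pvKw_len k hk
      have hklb : k.length ≤ bpE := ((pvOcc_iff tl k bpE).mp hkbp).1
      have hqk : (m + 2 - k.length) + k.length = m + 2 := by omega
      have hq15 : 15 ≤ m + 2 - k.length := by omega
      have hkq : pvOcc tl k (m+2-k.length) = true := by rw [← hbpq]; exact hkbp
      have hEq : pvEb tl m (m+2-k.length) = true := by rw [← hbpq]; exact hbpE
      by_cases hex1 : ∃ bp, pvC1Ab tl m bp = true
      · -- a surviving priority-1 break exists: D holds, contradicting hnD
        exfalso
        obtain ⟨w1, hw1⟩ := hex1
        have hr1 := pvC1Ab_range tl m w1 hw1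
        have hw1ne : w1 ≠ m+2-k.length := by
          intro he
          have hqf := pvC1A_q_false tl m hlen1 k hk hk1 hkq
          rw [he] at hw1
          rw [hqf] at hw1
          exact absurd hw1 (by simp)
        apply hnD
        refine ⟨(k, 1), (pvKw_BC k hk).1, by simpa using (pvKw_BC k hk).2, ?_⟩
        rw [← htl, hmt]
        refine ⟨hq15, (pvOcc2_iff tl k (m+1) (by omega)).mpr hk1,
          (pvOcc2_iff tl k (m+2-k.length) (by omega)).mpr hkq, ?_, ?_⟩
        · intro bp hbm h15 dp hdp h2 ho2
          have hlen6 := pvBC_len dp hdp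
          have ho := (pvOcc2_iff tl dp.1 bp (by omega)).mp ho2
          refine hno2 bp ?_
          simp only [pvC2b, pvInRangeb, Bool.and_eq_true, decide_eq_true_eq,
            List.any_eq_true]
          exact ⟨⟨h15, hbm⟩, dp.1, pvBC_p2 dp hdp h2, ho⟩
        · -- the surviving break w1 is the required other priority-1 break
          obtain ⟨p, hp, hop⟩ := List.any_eq_true.mp (pvP1b_of_C1A tl m w1 hw1)
          have hlen6 : p.length ≤ 6 :=
            pvBC_len (p, 1) (pvP1_BC p hp)
          exact ⟨w1, hr1.2, hr1.1, hw1ne, (p, 1), pvP1_BC p hp, rfl,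
            (pvOcc2_iff tl p w1 (by have := hr1.1; omega)).mpr hop⟩
      · -- no surviving priority-1 break: A returns the top space break, which is the
        -- skipped position itself (no space, comma or colon lies beyond it)
        have hno1A : ∀ bp, ¬ pvC1Ab tl m bp = true := not_exists.mp hex1
        have hC0q : pvC0b tl m (m+2-k.length) = true := pvE_C0 tl m _ hEq
        have hmax0 : ∀ bp, pvC0b tl m bp = true → bp ≤ m+2-k.length := by
          intro bp hbp
          have hsp : pvOcc tl [' '] bp = true := by
            simp only [pvC0b, Bool.and_eq_true] at hbp
            exact hbp.2
          exact pv_space_le_q tl k m bp hk hk1 (pvC0b_range tl m bp hbp).2 hsp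
        rw [pvA_char0 tl m hmn hno2 hno1A _ hC0q hmax0]
        have hmaxC1 : ∀ bp, pvC1b tl m bp = true → bp ≤ m+2-k.length := by
          intro bp hbp
          rcases (pvC1_iff tl m bp).mp hbp with h | h
          · exact absurd h (hno1A bp)
          · rw [pvE_unique tl m hlen1 k hk hk1 bp h]
        rw [pvB_val1 tl m hm15 hmn hno2 _ ((pvC1_iff tl m _).mpr (Or.inr hEq)) hmaxC1]
        show (if ((m+2-k.length : Nat) : Int) > 0 then ((m+2-k.length : Nat) : Int) else -1)
            = ((m+2-k.length : Nat) : Int)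
        rw [if_pos (by omega)]
    · have hnoE : ∀ bp, ¬ pvEb tl m bp = true := not_exists.mp hexE
      by_cases hex1 : ∃ bp, pvC1Ab tl m bp = true
      · obtain ⟨w1, hw1, hmax1⟩ := pv_exists_greatest _ m hex1 (fun bp h => (pvC1Ab_range tl m bp h).2)
        have h15w : 15 ≤ w1 := (pvC1Ab_range tl m w1 hw1).1
        have hmax1' : ∀ bp, pvC1b tl m bp = true → bp ≤ w1 := by
          intro bp hbp
          rcases (pvC1_iff tl m bp).mp hbp with h | h
          · exact hmax1 bp h
          · exact absurd h (hnoE bp)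
        rw [pvA_char1 tl m hmn hno2 w1 hw1 hmax1,
            pvB_val1 tl m hm15 hmn hno2 w1 ((pvC1_iff tl m w1).mpr (Or.inl hw1)) hmax1']
        show (if (w1 : Int) > 0 then (w1 : Int) else -1) = (w1 : Int)
        rw [if_pos (by omega)]
      · have hno1A : ∀ bp, ¬ pvC1Ab tl m bp = true := not_exists.mp hex1
        have hno1 : ∀ bp, ¬ pvC1b tl m bp = true := by
          intro bp hbp
          rcases (pvC1_iff tl m bp).mp hbp with h | h
          · exact hno1A bp h
          · exact hnoE bp h
        by_cases hex0 : ∃ bp, pvC0b tl m bp = true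
        · obtain ⟨w0, hw0, hmax0⟩ := pv_exists_greatest _ m hex0 (fun bp h => (pvC0b_range tl m bp h).2)
          rw [pvA_char0 tl m hmn hno2 hno1A w0 hw0 hmax0,
              pvB_val0 tl m hm15 hmn hno2 hno1 w0 hw0 hmax0]
          have h15w : 15 ≤ w0 := (pvC0b_range tl m w0 hw0).1
          show (if (w0 : Int) > 0 then (w0 : Int) else -1) = (w0 : Int)
          rw [if_pos (by omega)]
        · have hno0 : ∀ bp, ¬ pvC0b tl m bp = true := not_exists.mp hex0
          rw [pvA_charNone tl m hmn hno2 hno1A hno0, pvB_valNone tl m hm15 hmn hno2 hno1 hno0]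
          norm_num

-- final theorems (named versions, without the Claim_ wrappers)
theorem pv_spec_final (text : String) (ml : Int)
    (hnD : ¬ D_find_best_break_point text ml) :
    find_best_break_point text ml = find_best_break_point_alt text ml := by
  by_cases hle : ((text.toList.length : Int) ≤ ml)
  · rw [pvA_trivial text ml hle, pvB_trivial text ml hle]
  · by_cases h15 : ml < 15
    · rw [pvA_lt15 text ml hle h15, pvB_lt15 text ml hle h15]
    · exact pv_main_eq text ml ml.toNat (by omega) (by omega) (by omega) hnD

theorem pv_tight_final (text : String) (ml : Int)
    (hD : D_find_best_break_point text ml) :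
    find_best_break_point text ml ≠ find_best_break_point_alt text ml := by
  obtain ⟨cp, hcp, hlcp, hq15n, hB2n, hB3n, hB4, hB5⟩ := hD
  set tl := text.toList with htl
  set k := cp.1 with hkd
  have hk : k ∈ pvKw := pvBC_kw cp hcp hlcp
  have hkl := pvKw_len k hk
  have hml0 : 0 ≤ ml := by
    by_contra h
    have h0 : ml.toNat = 0 := by omega
    omega
  obtain ⟨m, hml'⟩ : ∃ m : Nat, ml = (m : Int) := ⟨ml.toNat, (Int.toNat_of_nonneg hml0).symm⟩
  have hmt : ml.toNat = m := by rw [hml', Int.toNat_natCast]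
  rw [hmt] at hq15n hB2n hB3n hB4 hB5
  have hq15 : 15 ≤ m + 2 - k.length := hq15n
  have hm15 : 15 ≤ m := by omega
  have hB2 : pvOcc tl k (m+1) = true := (pvOcc2_iff tl k (m+1) (by omega)).mp hB2n
  have hB3 : pvOcc tl k (m+2-k.length) = true :=
    (pvOcc2_iff tl k (m+2-k.length) (by omega)).mp hB3n
  have hmn : m < tl.length := by
    have hpre := ((pvOcc_iff tl k (m+1)).mp hB2).2
    have := hpre.length_le
    simp only [List.length_drop] at this
    omega
  have hlen1 : m + 1 ≤ tl.length := by omega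
  have hle : ¬ ((tl.length : Int) ≤ ml) := by omega
  have hEq : pvEb tl m (m+2-k.length) = true := pvE_intro tl m k hk hB2 hB3 hq15
  have hno2 : ∀ bp, ¬ pvC2b tl m bp = true := by
    intro bp h
    have hr := pvC2b_range tl m bp h
    simp only [pvC2b, pvInRangeb, Bool.and_eq_true, decide_eq_true_eq,
      List.any_eq_true] at h
    obtain ⟨_, p, hp, hop⟩ := h
    have hl1 : p.length = 1 := by fin_cases hp <;> rfl
    exact hB4 bp hr.2 hr.1 (p, 2) (pvP2_BC p hp) rfl
      ((pvOcc2_iff tl p bp (by omega)).mpr hop)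
  -- the other priority-1 break from D is a surviving candidate
  obtain ⟨b1, hb1m, hb115, hb1ne, dp, hdp, hdp1, hdpo⟩ := hB5
  have hdl := pvBC_len dp hdp
  have hdo : pvOcc tl dp.1 b1 = true := (pvOcc2_iff tl dp.1 b1 (by omega)).mp hdpo
  have hP1b1 : pvP1b tl b1 = true := by
    simp only [pvP1b, List.any_eq_true]
    exact ⟨dp.1, pvBC_p1 dp hdp hdp1, hdo⟩
  have hC1b1 : pvC1Ab tl m b1 = true :=
    pvC1A_of_P1b tl m b1 hlen1 k hk hB2 hb115 hb1m hb1ne hP1b1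
  obtain ⟨w1, hw1, hmax1⟩ := pv_exists_greatest (fun bp => pvC1Ab tl m bp = true) m
    ⟨b1, hC1b1⟩ (fun bp h => (pvC1Ab_range tl m bp h).2)
  have h15w : 15 ≤ w1 := (pvC1Ab_range tl m w1 hw1).1
  have hw1ne : w1 ≠ m+2-k.length := by
    intro he
    have hqf := pvC1A_q_false tl m hlen1 k hk hB2 hB3
    rw [he] at hw1
    rw [hqf] at hw1
    exact absurd hw1 (by simp)
  have hw1q : w1 < m+2-k.length :=
    pv_p1_lt_q tl k m w1 hk hB2 (pvC1Ab_range tl m w1 hw1).2 hw1ne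
      (pvP1b_of_C1A tl m w1 hw1)
  have hmaxC1 : ∀ bp, pvC1b tl m bp = true → bp ≤ m+2-k.length := by
    intro bp hbp
    rcases (pvC1_iff tl m bp).mp hbp with h | h
    · have := hmax1 bp h
      omega
    · rw [pvE_unique tl m hlen1 k hk hB2 bp h]
  have hml1 : ml + 1 = ((m+1 : Nat) : Int) := by omega
  rw [pvA_main text ml m hml' hmn, pvB_main text ml hle, hml1]
  rw [pvB_val1 tl m hm15 hmn hno2 _ ((pvC1_iff tl m _).mpr (Or.inr hEq)) hmaxC1]
  rw [pvA_char1 tl m hmn hno2 w1 hw1 hmax1]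
  show (if (w1 : Int) > 0 then (w1 : Int) else -1) ≠ ((1:Int), ((m+2-k.length : Nat) : Int)).2
  rw [if_pos (by omega)]
  show (w1 : Int) ≠ ((m+2-k.length : Nat) : Int)
  omega

-- ===== VERDICT =====
theorem find_best_break_point_spec : Claim_unchanged_find_best_break_point := by
  intro text max_length _
  unfold Spec_find_best_break_point
  intro hnD
  exact pv_spec_final text max_length hnD

set_option maxRecDepth 100000 in
theorem find_best_break_point_changed : Claim_changed_find_best_break_point := by
  unfold Claim_changed_find_best_break_point; decide

theorem find_best_break_point_tight : Claim_exact_find_best_break_point := by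
  intro text max_length _ hD
  exact pv_tight_final text max_length hD
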